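-- pv_equiv track=rewrite | github.com/UdayCherri/M0ST.AI | data/datasets/scripts/dataset_builder.py | _estimate_loop_depths
-- ===== SOURCE A (Python) =====
-- from typing import Any, Dict, Iterable, List, Optional, Sequence, Tuple
--
-- def _estimate_loop_depths(blocks: List[int], edges: List[Tuple[int, int]]) -> Dict[int, int]:
--     adjacency: Dict[int, List[int]] = {bb: [] for bb in blocks}
--     reverse_adjacency: Dict[int, List[int]] = {bb: [] for bb in blocks}
--     self_loops: Dict[int, bool] = {bb: False for bb in blocks}
--
--     for src, dst in edges:
--         if src not in adjacency or dst not in adjacency: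
--             continue
--         adjacency[src].append(dst)
--         reverse_adjacency[dst].append(src)
--         if src == dst:
--             self_loops[src] = True
--
--     visited: set[int] = set()
--     order: List[int] = []
--
--     def dfs(node: int) -> None:
--         visited.add(node)
--         for nxt in adjacency[node]:
--             if nxt not in visited:
--                 dfs(nxt)
--         order.append(node)
--
--     for bb in blocks:
--         if bb not in visited:
--             dfs(bb)
--
--     visited.clear()
--     components: List[List[int]] = []
--
--     def reverse_dfs(node: int, acc: List[int]) -> None:
--         visited.add(node)
--         acc.append(node)
--         for prev in reverse_adjacency[node]:
--             if prev not in visited: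
--                 reverse_dfs(prev, acc)
--
--     for bb in reversed(order):
--         if bb in visited:
--             continue
--         component: List[int] = []
--         reverse_dfs(bb, component)
--         components.append(component)
--
--     depth: Dict[int, int] = {bb: 0 for bb in blocks}
--     for comp in components:
--         if len(comp) > 1:
--             for bb in comp:
--                 depth[bb] += 1
--         elif comp and self_loops.get(comp[0], False):
--             depth[comp[0]] += 1
--     return depth
-- ===== SOURCE B (Python) =====
-- def _estimate_loop_depths(blocks, edges):
--     keys = list(dict.fromkeys(blocks))
--     nodeset = set(keys)
--     fedges = [(s, d) for (s, d) in edges if s in nodeset and d in nodeset]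
--     succ = {b: [d for (s, d) in fedges if s == b] for b in keys}
--     pred = {b: [s for (s, d) in fedges if d == b] for b in keys}
--     selfloop = {s for (s, d) in fedges if s == d}
--
--     # pass 1: finish order via iterative DFS with an explicit stack of
--     # (node, unexplored successors) frames
--     order = []
--     seen = set()
--     for b in blocks:
--         if b in seen:
--             continue
--         seen.add(b)
--         stack = [(b, succ[b])]
--         while stack:
--             node, rest = stack.pop()
--             nxt = None
--             for i, cand in enumerate(rest):
--                 if cand not in seen:
--                     nxt = cand
--                     tail = rest[i + 1:]
--                     break
--             if nxt is None:
--                 order.append(node)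
--             else:
--                 stack.append((node, tail))
--                 seen.add(nxt)
--                 stack.append((nxt, succ[nxt]))
--
--     # pass 2: per root (in reverse finish order) an iterative reverse
--     # reachability sweep; no component lists, just a size and the loopy set
--     loopy = set()
--     seen = set()
--     for r in reversed(order):
--         if r in seen:
--             continue
--         seen.add(r)
--         size = 1
--         stack = [r]
--         while stack:
--             node = stack.pop()
--             for p in pred[node]:
--                 if p not in seen:
--                     seen.add(p)
--                     size += 1
--                     loopy.add(p)
--                     stack.append(p)
--         if size > 1:
--             loopy.add(r)
--         elif r in selfloop:
--             loopy.add(r)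
--     return {b: (1 if b in loopy else 0) for b in keys}
-- ===== Notes on version B (the rewrite author's own statement) =====
-- stated objective: alternative
-- what changed: Both recursive DFS passes of Kosaraju are replaced by iterative ones: pass 1 becomes an explicit-stack machine over (node, unexplored-successors) frames producing the same finish order, and pass 2 becomes a per-root stack-based reverse-reachability sweep that keeps only a size counter and the set of loop nodes instead of building component lists; adjacency/reverse-adjacency/self-loop maps are built by comprehensions over the filtered edge list instead of incremental dict appends, and the result dict is emitted at the end from the loopy set.
import Mathlib
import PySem

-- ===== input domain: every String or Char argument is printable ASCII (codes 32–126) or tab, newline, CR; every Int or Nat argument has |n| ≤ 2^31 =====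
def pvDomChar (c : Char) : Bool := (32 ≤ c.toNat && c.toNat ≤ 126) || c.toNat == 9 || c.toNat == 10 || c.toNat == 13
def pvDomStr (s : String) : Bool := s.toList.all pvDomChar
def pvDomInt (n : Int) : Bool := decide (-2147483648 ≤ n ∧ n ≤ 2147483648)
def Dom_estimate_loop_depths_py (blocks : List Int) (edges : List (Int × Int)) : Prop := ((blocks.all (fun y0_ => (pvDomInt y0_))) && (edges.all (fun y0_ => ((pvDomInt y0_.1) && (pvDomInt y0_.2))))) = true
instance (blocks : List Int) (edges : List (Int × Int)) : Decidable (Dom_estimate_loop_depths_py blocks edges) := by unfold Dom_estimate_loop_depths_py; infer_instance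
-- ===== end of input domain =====

-- B replaces the recursive two-pass Kosaraju machinery by an explicit-stack pass-1 DFS,
-- a stack-based reverse-reachability sweep per root in pass 2 (no component lists, just a
-- size counter and a 'loopy' set), and comprehension-built adjacency; objective: alternative
-- (structurally different, same results; not faster).

-- ===== PORT A =====
-- recursive DFS of pass 1 (visited, order); fuel only makes the recursion total
def pvDfsA (adj : PySem.Dict Int (List Int)) : Nat → Int → (PySem.Set Int × List Int) → (PySem.Set Int × List Int)
  | 0, _, st => st
  | fuel+1, node, st =>
    let st1 : PySem.Set Int × List Int := (PySem.Set.add st.1 node, st.2)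
    let st2 := (adj.getD node []).foldl
      (fun acc nxt => if nxt ∈ acc.1 then acc else pvDfsA adj fuel nxt acc) st1
    (st2.1, st2.2 ++ [node])

-- recursive reverse DFS of pass 2 (visited, component accumulator)
def pvRdfsA (radj : PySem.Dict Int (List Int)) : Nat → Int → (PySem.Set Int × List Int) → (PySem.Set Int × List Int)
  | 0, _, st => st
  | fuel+1, node, st =>
    let st1 : PySem.Set Int × List Int := (PySem.Set.add st.1 node, st.2 ++ [node])
    (radj.getD node []).foldl
      (fun acc prev => if prev ∈ acc.1 then acc else pvRdfsA radj fuel prev acc) st1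

def estimate_loop_depths_py (blocks : List Int) (edges : List (Int × Int)) : List (Int × Int) :=
  let adj0 : PySem.Dict Int (List Int) := blocks.foldl (fun d b => d.insert b []) PySem.Dict.empty
  let radj0 : PySem.Dict Int (List Int) := blocks.foldl (fun d b => d.insert b []) PySem.Dict.empty
  let sl0 : PySem.Dict Int Bool := blocks.foldl (fun d b => d.insert b false) PySem.Dict.empty
  let t := edges.foldl
    (fun (t : PySem.Dict Int (List Int) × PySem.Dict Int (List Int) × PySem.Dict Int Bool) e =>
      if !(t.1.contains e.1) || !(t.1.contains e.2) then t
      else (t.1.modify e.1 [] (· ++ [e.2]), t.2.1.modify e.2 [] (· ++ [e.1]),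
            if e.1 = e.2 then t.2.2.insert e.1 true else t.2.2))
    (adj0, radj0, sl0)
  let adjacency := t.1
  let radjacency := t.2.1
  let self_loops := t.2.2
  let p1 := blocks.foldl
    (fun st bb => if bb ∈ st.1 then st else pvDfsA adjacency (blocks.length + 1) bb st)
    (([] : PySem.Set Int), ([] : List Int))
  let order := p1.2
  let p2 := order.reverse.foldl
    (fun (st : PySem.Set Int × List (List Int)) bb =>
      if bb ∈ st.1 then st
      else
        let r := pvRdfsA radjacency (blocks.length + 1) bb (st.1, [])
        (r.1, st.2 ++ [r.2]))
    (([] : PySem.Set Int), ([] : List (List Int)))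
  let comps := p2.2
  let depth0 : PySem.Dict Int Int := blocks.foldl (fun d b => d.insert b 0) PySem.Dict.empty
  let depth := comps.foldl
    (fun d comp =>
      if 1 < comp.length then comp.foldl (fun d bb => d.modify bb 0 (· + 1)) d
      else
        match comp with
        | [] => d
        | c0 :: _ => if self_loops.getD c0 false then d.modify c0 0 (· + 1) else d)
    depth0
  depth.items

-- ===== PORT B =====
-- scan of the frame's unexplored successors for the first unseen one
def pvFindNext (seen : PySem.Set Int) : List Int → Option (Int × List Int)
  | [] => none
  | c :: cs => if c ∈ seen then pvFindNext seen cs else some (c, cs)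

-- pass-1 DFS machine on an explicit stack of (node, unexplored successors)
def pvRunM (succ : PySem.Dict Int (List Int)) :
    Nat → List (Int × List Int) → (PySem.Set Int × List Int) → (PySem.Set Int × List Int)
  | _, [], st => st
  | 0, _ :: _, st => st
  | fuel+1, (node, rest) :: stk, st =>
    match pvFindNext st.1 rest with
    | none => pvRunM succ fuel stk (st.1, st.2 ++ [node])
    | some (nxt, tail) =>
      pvRunM succ fuel ((nxt, succ.getD nxt []) :: (node, tail) :: stk)
        (PySem.Set.add st.1 nxt, st.2)

-- pass-2 reverse-reachability sweep: state (seen, size, loopy)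
def pvRunR (pred : PySem.Dict Int (List Int)) :
    Nat → List Int → (PySem.Set Int × Int × PySem.Set Int) → (PySem.Set Int × Int × PySem.Set Int)
  | _, [], st => st
  | 0, _ :: _, st => st
  | fuel+1, node :: stk, st =>
    let r := (pred.getD node []).foldl
      (fun (acc : List Int × PySem.Set Int × Int × PySem.Set Int) p =>
        if p ∈ acc.2.1 then acc
        else (p :: acc.1, PySem.Set.add acc.2.1 p, acc.2.2.1 + 1, PySem.Set.add acc.2.2.2 p))
      (stk, st)
    pvRunR pred fuel r.1 r.2

def estimate_loop_depths_py_alt (blocks : List Int) (edges : List (Int × Int)) : List (Int × Int) :=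
  let keys := PySem.List.dedup blocks
  let nodeset := PySem.Set.ofList keys
  let fedges := edges.filter (fun e => nodeset.contains e.1 && nodeset.contains e.2)
  let succ : PySem.Dict Int (List Int) :=
    keys.foldl (fun d b => d.insert b ((fedges.filter (fun e => e.1 == b)).map (·.2))) PySem.Dict.empty
  let pred : PySem.Dict Int (List Int) :=
    keys.foldl (fun d b => d.insert b ((fedges.filter (fun e => e.2 == b)).map (·.1))) PySem.Dict.empty
  let selfloop : PySem.Set Int := PySem.Set.ofList ((fedges.filter (fun e => e.1 == e.2)).map (·.1))
  let p1 := blocks.foldl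
    (fun (st : PySem.Set Int × List Int) b =>
      if b ∈ st.1 then st
      else pvRunM succ (2 * blocks.length + 2) [(b, succ.getD b [])] (PySem.Set.add st.1 b, st.2))
    (([] : PySem.Set Int), ([] : List Int))
  let order := p1.2
  let p2 := order.reverse.foldl
    (fun (st : PySem.Set Int × PySem.Set Int) r =>
      if r ∈ st.1 then st
      else
        let q := pvRunR pred (blocks.length + 2) [r] (PySem.Set.add st.1 r, 1, st.2)
        let loopy2 :=
          if 1 < q.2.1 then PySem.Set.add q.2.2 r
          else if r ∈ selfloop then PySem.Set.add q.2.2 r else q.2.2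
        (q.1, loopy2))
    (([] : PySem.Set Int), ([] : PySem.Set Int))
  let loopy := p2.2
  keys.map (fun b => (b, if b ∈ loopy then (1 : Int) else 0))

-- ===== PRECONDITION & SPEC =====
def Spec_estimate_loop_depths_py (blocks : List Int) (edges : List (Int × Int)) (out : List (Int × Int)) : Prop := out = estimate_loop_depths_py_alt blocks edges
instance (blocks : List Int) (edges : List (Int × Int)) (out : List (Int × Int)) : Decidable (Spec_estimate_loop_depths_py blocks edges out) := by unfold Spec_estimate_loop_depths_py; infer_instance

-- ===== CLAIM (what is proved, stated in full; the proofs are below) =====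
def Claim_equal_estimate_loop_depths_py : Prop := ∀ (blocks : List Int) (edges : List (Int × Int)), Dom_estimate_loop_depths_py blocks edges → Spec_estimate_loop_depths_py blocks edges (estimate_loop_depths_py blocks edges)

-- ===== LEMMAS AND PROOFS =====
-- utilities
def pvUnvis (N vis : List Int) : Nat := (N.filter (fun x => decide (x ∉ vis))).length

theorem pvUnvis_le_length (N vis : List Int) : pvUnvis N vis ≤ N.length := by
  simpa [pvUnvis] using List.length_filter_le _ N

theorem pvUnvis_mono (N vis vis' : List Int) (h : ∀ x ∈ vis, x ∈ vis') :
    pvUnvis N vis' ≤ pvUnvis N vis := by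
  simp only [pvUnvis, ← List.countP_eq_length_filter]
  refine List.countP_mono_left (fun a _ ha => ?_)
  simp only [decide_eq_true_eq] at *
  exact fun hav => ha (h a hav)

theorem pvUnvis_append_lt (N vis : List Int) (b : Int) (hb : b ∈ N) (hnb : b ∉ vis) :
    pvUnvis N (vis ++ [b]) < pvUnvis N vis := by
  have hf : N.filter (fun x => decide (x ∉ vis ++ [b]))
      = (N.filter (fun x => decide (x ∉ vis))).filter (fun x => decide (x ≠ b)) := by
    rw [List.filter_filter]
    apply List.filter_congr
    intro x _
    by_cases h1 : x ∈ vis <;> by_cases h2 : x = b <;> simp [h1, h2]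
  have hbM : b ∈ N.filter (fun x => decide (x ∉ vis)) := by
    simp [List.mem_filter, hb, hnb]
  simp only [pvUnvis, hf]
  apply List.length_filter_lt_length_iff_exists.2
  exact ⟨b, hbM, by simp⟩

-- ===== A-side pass-1 DFS: fold wrapper, bundle, fuel-irrelevance =====
def pvFoldDfs (dA : PySem.Dict Int (List Int)) (fuel : Nat) (l : List Int)
    (st : PySem.Set Int × List Int) : PySem.Set Int × List Int :=
  l.foldl (fun st nxt => if nxt ∈ st.1 then st else pvDfsA dA fuel nxt st) st

theorem pvDfsA_succ (dA : PySem.Dict Int (List Int)) (fuel : Nat) (node : Int)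
    (st : PySem.Set Int × List Int) :
    pvDfsA dA (fuel+1) node st =
      ((pvFoldDfs dA fuel (dA.getD node []) (PySem.Set.add st.1 node, st.2)).1,
       (pvFoldDfs dA fuel (dA.getD node []) (PySem.Set.add st.1 node, st.2)).2 ++ [node]) := rfl

theorem pvFoldDfs_nil (dA : PySem.Dict Int (List Int)) (fuel : Nat) (st : PySem.Set Int × List Int) :
    pvFoldDfs dA fuel [] st = st := rfl

theorem pvFoldDfs_cons (dA : PySem.Dict Int (List Int)) (fuel : Nat) (x : Int) (xs : List Int)
    (st : PySem.Set Int × List Int) :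
    pvFoldDfs dA fuel (x :: xs) st
      = pvFoldDfs dA fuel xs (if x ∈ st.1 then st else pvDfsA dA fuel x st) := rfl

theorem pvFoldDfs_skip (dA : PySem.Dict Int (List Int)) (fuel : Nat) (l : List Int)
    (st : PySem.Set Int × List Int) (h : ∀ x ∈ l, x ∈ st.1) :
    pvFoldDfs dA fuel l st = st := by
  induction l with
  | nil => rfl
  | cons x xs ih =>
    rw [pvFoldDfs_cons, if_pos (h x (by simp))]
    exact ih (fun y hy => h y (by simp [hy]))

theorem pvFoldDfs_bundle_aux (dA : PySem.Dict Int (List Int)) (N : List Int)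
    (fuel : Nat)
    (ih : ∀ node vis ord, node ∈ N → node ∉ vis → vis.Nodup → pvUnvis N vis < fuel →
      ∃ δv δo, pvDfsA dA fuel node (vis, ord) = (vis ++ δv, ord ++ δo) ∧ δv.Perm δo ∧
        node ∈ δv ∧ (∀ x ∈ δv, x ∈ N) ∧ (vis ++ δv).Nodup) :
    ∀ l vis ord, (∀ x ∈ l, x ∈ N) → vis.Nodup → pvUnvis N vis < fuel →
    ∃ δv δo, pvFoldDfs dA fuel l (vis, ord) = (vis ++ δv, ord ++ δo) ∧ δv.Perm δo ∧
      (∀ x ∈ δv, x ∈ N) ∧ (vis ++ δv).Nodup := by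
  intro l
  induction l with
  | nil => intro vis ord _ hnd _; exact ⟨[], [], by simp [pvFoldDfs_nil], by simp, by simp, by simpa⟩
  | cons x xs ihl =>
    intro vis ord hl hnd hf
    by_cases hx : x ∈ vis
    · rw [pvFoldDfs_cons, if_pos hx]
      exact ihl vis ord (fun y hy => hl y (by simp [hy])) hnd hf
    · rw [pvFoldDfs_cons, if_neg hx]
      obtain ⟨δv, δo, heq, hperm, hmem, hN, hnd'⟩ :=
        ih x vis ord (hl x (by simp)) hx hnd hf
      rw [heq]
      have hf' : pvUnvis N (vis ++ δv) < fuel :=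
        lt_of_le_of_lt (pvUnvis_mono N vis (vis ++ δv) (fun y hy => by simp [hy])) hf
      obtain ⟨δv', δo', heq', hperm', hN', hnd''⟩ :=
        ihl (vis ++ δv) (ord ++ δo) (fun y hy => hl y (by simp [hy])) hnd' hf'
      refine ⟨δv ++ δv', δo ++ δo', by rw [heq']; simp, hperm.append hperm', ?_, ?_⟩
      · intro y hy; rcases List.mem_append.1 hy with h | h
        · exact hN y h
        · exact hN' y h
      · simpa [List.append_assoc] using hnd''

theorem pvDfsA_bundle (dA : PySem.Dict Int (List Int)) (N : List Int)
    (HvA : ∀ b x, x ∈ dA.getD b [] → x ∈ N) :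
    ∀ (fuel : Nat) node vis ord, node ∈ N → node ∉ vis → vis.Nodup → pvUnvis N vis < fuel →
    ∃ δv δo, pvDfsA dA fuel node (vis, ord) = (vis ++ δv, ord ++ δo) ∧ δv.Perm δo ∧
      node ∈ δv ∧ (∀ x ∈ δv, x ∈ N) ∧ (vis ++ δv).Nodup := by
  intro fuel
  induction fuel with
  | zero => intro node vis ord _ _ _ hf; omega
  | succ fuel ih =>
    intro node vis ord hN hnv hnd hf
    rw [pvDfsA_succ]
    have hadd : PySem.Set.add vis node = vis ++ [node] := PySem.Set.add_of_not_mem hnv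
    have hnd1 : (vis ++ [node]).Nodup :=
      hnd.append (List.nodup_singleton node)
        (fun a ha hb => hnv (by rwa [List.mem_singleton.1 hb] at ha))
    have hf1 : pvUnvis N (vis ++ [node]) < fuel := by
      have := pvUnvis_append_lt N vis node hN hnv; omega
    obtain ⟨δv, δo, heq, hperm, hNs, hnd'⟩ :=
      pvFoldDfs_bundle_aux dA N fuel ih (dA.getD node []) (vis ++ [node]) ord
        (fun x hx => HvA node x hx) hnd1 hf1
    simp only [hadd, heq]
    refine ⟨node :: δv, δo ++ [node], by simp, ?_, by simp, ?_, ?_⟩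
    · exact (hperm.cons node).trans (List.perm_append_singleton node δo).symm
    · intro y hy; rcases List.mem_cons.1 hy with rfl | h
      · exact hN
      · exact hNs y h
    · simpa [List.append_assoc] using hnd'

-- fuel irrelevance for pvDfsA / pvFoldDfs
theorem pvFoldDfs_fuel_congr_aux (dA : PySem.Dict Int (List Int)) (N : List Int)
    (HvA : ∀ b x, x ∈ dA.getD b [] → x ∈ N) (f1 f2 : Nat)
    (ih : ∀ node vis ord, node ∈ N → node ∉ vis → vis.Nodup → pvUnvis N vis < f1 →
      pvUnvis N vis < f2 → pvDfsA dA f1 node (vis, ord) = pvDfsA dA f2 node (vis, ord)) :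
    ∀ l vis ord, (∀ x ∈ l, x ∈ N) → vis.Nodup → pvUnvis N vis < f1 → pvUnvis N vis < f2 →
    pvFoldDfs dA f1 l (vis, ord) = pvFoldDfs dA f2 l (vis, ord) := by
  intro l
  induction l with
  | nil => intro vis ord _ _ _ _; rfl
  | cons x xs ihl =>
    intro vis ord hl hnd h1 h2
    by_cases hx : x ∈ vis
    · rw [pvFoldDfs_cons, pvFoldDfs_cons, if_pos hx, if_pos hx]
      exact ihl vis ord (fun y hy => hl y (by simp [hy])) hnd h1 h2
    · rw [pvFoldDfs_cons, pvFoldDfs_cons, if_neg hx, if_neg hx,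
        ← ih x vis ord (hl x (by simp)) hx hnd h1 h2]
      obtain ⟨δv, δo, heq, _, _, _, hnd'⟩ :=
        pvDfsA_bundle dA N HvA f1 x vis ord (hl x (by simp)) hx hnd h1
      rw [heq]
      have hm : pvUnvis N (vis ++ δv) ≤ pvUnvis N vis :=
        pvUnvis_mono N vis (vis ++ δv) (fun y hy => by simp [hy])
      exact ihl (vis ++ δv) (ord ++ δo) (fun y hy => hl y (by simp [hy])) hnd'
        (by omega) (by omega)

theorem pvDfsA_fuel_congr (dA : PySem.Dict Int (List Int)) (N : List Int)
    (HvA : ∀ b x, x ∈ dA.getD b [] → x ∈ N) :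
    ∀ f1 f2 node vis ord, node ∈ N → node ∉ vis → vis.Nodup → pvUnvis N vis < f1 →
      pvUnvis N vis < f2 → pvDfsA dA f1 node (vis, ord) = pvDfsA dA f2 node (vis, ord) := by
  intro f1
  induction f1 with
  | zero => intro f2 node vis ord _ _ _ h1 _; omega
  | succ f1 ih =>
    intro f2 node vis ord hN hnv hnd h1 h2
    match f2, h2 with
    | f2 + 1, h2 =>
      rw [pvDfsA_succ, pvDfsA_succ]
      have hadd : PySem.Set.add vis node = vis ++ [node] := PySem.Set.add_of_not_mem hnv
      have hlt := pvUnvis_append_lt N vis node hN hnv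
      have hnd1 : (vis ++ [node]).Nodup :=
        hnd.append (List.nodup_singleton node)
          (fun a ha hb => hnv (by rwa [List.mem_singleton.1 hb] at ha))
      have hcongr := pvFoldDfs_fuel_congr_aux dA N HvA f1 f2
        (fun n v o a b c d e => ih f2 n v o a b c d e)
        (dA.getD node []) (vis ++ [node]) ord (fun x hx => HvA node x hx) hnd1
        (by omega) (by omega)
      simp only [hadd, hcongr]

-- findNext characterisation
theorem pvFindNext_none (seen : PySem.Set Int) :
    ∀ l, pvFindNext seen l = none → ∀ c ∈ l, c ∈ seen := by
  intro l
  induction l with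
  | nil => intro _ c hc; simp at hc
  | cons x xs ih =>
    intro h c hc
    rw [pvFindNext] at h
    by_cases hx : x ∈ seen
    · rw [if_pos hx] at h
      rcases List.mem_cons.1 hc with rfl | hcs
      · exact hx
      · exact ih h c hcs
    · rw [if_neg hx] at h; exact absurd h (by simp)

theorem pvFindNext_some (seen : PySem.Set Int) :
    ∀ l nxt tail, pvFindNext seen l = some (nxt, tail) →
    ∃ pre, l = pre ++ nxt :: tail ∧ (∀ c ∈ pre, c ∈ seen) ∧ nxt ∉ seen := by
  intro l
  induction l with
  | nil => intro nxt tail h; simp [pvFindNext] at h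
  | cons x xs ih =>
    intro nxt tail h
    rw [pvFindNext] at h
    by_cases hx : x ∈ seen
    · rw [if_pos hx] at h
      obtain ⟨pre, heq, hpre, hn⟩ := ih nxt tail h
      exact ⟨x :: pre, by simp [heq], fun c hc => by
        rcases List.mem_cons.1 hc with rfl | hcs
        · exact hx
        · exact hpre c hcs, hn⟩
    · rw [if_neg hx] at h
      obtain ⟨rfl, rfl⟩ : nxt = x ∧ tail = xs := by
        simpa [Prod.ext_iff, eq_comm] using h
      exact ⟨[], by simp, by simp, hx⟩

-- the A-side "finish one frame" operation, and the machine simulation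
def pvFinishA (dA : PySem.Dict Int (List Int)) (fuelA : Nat) (node : Int) (rest : List Int)
    (st : PySem.Set Int × List Int) : PySem.Set Int × List Int :=
  ((pvFoldDfs dA fuelA rest st).1, (pvFoldDfs dA fuelA rest st).2 ++ [node])

theorem pvRunM_nil (dB : PySem.Dict Int (List Int)) (fuel : Nat) (st : PySem.Set Int × List Int) :
    pvRunM dB fuel [] st = st := by cases fuel <;> rfl

theorem pvDfsA_eq_finish (dA : PySem.Dict Int (List Int)) (N : List Int)
    (HvA : ∀ b x, x ∈ dA.getD b [] → x ∈ N) (fuelA : Nat) (HA : N.length < fuelA) :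
    ∀ nxt vis ord, nxt ∈ N → nxt ∉ vis → vis.Nodup →
    pvDfsA dA fuelA nxt (vis, ord) = pvFinishA dA fuelA nxt (dA.getD nxt []) (vis ++ [nxt], ord) := by
  intro nxt vis ord hN hnv hnd
  match fuelA, HA with
  | k + 1, HA =>
    rw [pvDfsA_succ]
    have hadd : PySem.Set.add vis nxt = vis ++ [nxt] := PySem.Set.add_of_not_mem hnv
    have hlt := pvUnvis_append_lt N vis nxt hN hnv
    have hle := pvUnvis_le_length N vis
    have hnd1 : (vis ++ [nxt]).Nodup :=
      hnd.append (List.nodup_singleton nxt)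
        (fun a ha hb => hnv (by rwa [List.mem_singleton.1 hb] at ha))
    have hcongr := pvFoldDfs_fuel_congr_aux dA N HvA k (k+1)
      (fun n v o a b c d e => pvDfsA_fuel_congr dA N HvA k (k+1) n v o a b c d e)
      (dA.getD nxt []) (vis ++ [nxt]) ord (fun x hx => HvA nxt x hx) hnd1
      (by omega) (by omega)
    simp only [hadd, hcongr, pvFinishA]

theorem pvRunM_sim (dA dB : PySem.Dict Int (List Int)) (N : List Int)
    (HvA : ∀ b x, x ∈ dA.getD b [] → x ∈ N)
    (HvB : ∀ b x, x ∈ dB.getD b [] → x ∈ N)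
    (hEq : ∀ b, dA.getD b [] = dB.getD b [])
    (fuelA : Nat) (HA : N.length < fuelA) :
    ∀ fuel node rest stk vis ord,
      (∀ x ∈ rest, x ∈ N) → (∀ fr ∈ stk, ∀ x ∈ fr.2, x ∈ N) → vis.Nodup →
      stk.length + 1 + 2 * pvUnvis N vis < fuel →
      ∃ fuel', fuel' ≤ fuel ∧
        pvRunM dB fuel ((node, rest) :: stk) (vis, ord)
          = pvRunM dB fuel' stk (pvFinishA dA fuelA node rest (vis, ord)) ∧
        stk.length + 2 * pvUnvis N (pvFinishA dA fuelA node rest (vis, ord)).1 < fuel' ∧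
        (pvFinishA dA fuelA node rest (vis, ord)).1.Nodup := by
  intro fuel
  induction fuel using Nat.strong_induction_on with
  | _ fuel IH =>
  intro node rest stk vis ord hrest hstk hnd hfuel
  match fuel, hfuel with
  | f + 1, hfuel =>
  cases hfn : pvFindNext vis rest with
  | none =>
    have hall := pvFindNext_none vis rest hfn
    have hfin : pvFinishA dA fuelA node rest (vis, ord) = (vis, ord ++ [node]) := by
      simp [pvFinishA, pvFoldDfs_skip dA fuelA rest (vis, ord) hall]
    refine ⟨f, by omega, ?_, ?_, ?_⟩
    · show (match pvFindNext vis rest with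
        | none => pvRunM dB f stk (vis, ord ++ [node])
        | some (nxt, tail) =>
          pvRunM dB f ((nxt, dB.getD nxt []) :: (node, tail) :: stk)
            (PySem.Set.add vis nxt, ord)) = _
      rw [hfn, hfin]
    · rw [hfin]; show stk.length + 2 * pvUnvis N vis < f; omega
    · rw [hfin]; exact hnd
  | some p =>
    obtain ⟨nxt, tail⟩ := p
    obtain ⟨pre, rfl, hpre, hnnxt⟩ := pvFindNext_some vis rest nxt tail hfn
    have hnxtN : nxt ∈ N := hrest nxt (by simp)
    have hadd : PySem.Set.add vis nxt = vis ++ [nxt] := PySem.Set.add_of_not_mem hnnxt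
    have hlt := pvUnvis_append_lt N vis nxt hnxtN hnnxt
    have hnd1 : (vis ++ [nxt]).Nodup :=
      hnd.append (List.nodup_singleton nxt)
        (fun a ha hb => hnnxt (by rwa [List.mem_singleton.1 hb] at ha))
    obtain ⟨f1, hf1le, heq1, hb1, hnd2⟩ :=
      IH f (by omega) nxt (dB.getD nxt []) ((node, tail) :: stk) (vis ++ [nxt]) ord
        (fun x hx => HvB nxt x hx)
        (by
          intro fr hfr x hx
          rcases List.mem_cons.1 hfr with rfl | hfr'
          · exact hrest x (by simp [hx])
          · exact hstk fr hfr' x hx)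
        hnd1 (by simp; omega)
    have hS1 : pvFinishA dA fuelA nxt (dB.getD nxt []) (vis ++ [nxt], ord)
        = pvDfsA dA fuelA nxt (vis, ord) := by
      rw [← hEq nxt, ← pvDfsA_eq_finish dA N HvA fuelA HA nxt vis ord hnxtN hnnxt hnd]
    cases hXe : pvDfsA dA fuelA nxt (vis, ord) with
    | mk Xv Xo =>
      rw [hXe] at hS1
      rw [hS1] at heq1 hb1 hnd2
      obtain ⟨f2, hf2le, heq2, hb2, hnd3⟩ :=
        IH f1 (by omega) node tail stk Xv Xo
          (fun x hx => hrest x (by simp [hx])) (fun fr hfr x hx => hstk fr hfr x hx)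
          hnd2 (by simpa using hb1)
      have hdecomp : pvFinishA dA fuelA node (pre ++ nxt :: tail) (vis, ord)
          = pvFinishA dA fuelA node tail (Xv, Xo) := by
        have hskip : pvFoldDfs dA fuelA pre (vis, ord) = (vis, ord) :=
          pvFoldDfs_skip dA fuelA pre (vis, ord) hpre
        have happ : pvFoldDfs dA fuelA (pre ++ nxt :: tail) (vis, ord)
            = pvFoldDfs dA fuelA tail (Xv, Xo) := by
          rw [pvFoldDfs, List.foldl_append, ← pvFoldDfs, ← pvFoldDfs, hskip,
            pvFoldDfs_cons, if_neg hnnxt, hXe]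
        simp only [pvFinishA, happ]
      refine ⟨f2, by omega, ?_, by rw [hdecomp]; exact hb2, by rw [hdecomp]; exact hnd3⟩
      show (match pvFindNext vis (pre ++ nxt :: tail) with
        | none => pvRunM dB f stk (vis, ord ++ [node])
        | some (nxt, tail) =>
          pvRunM dB f ((nxt, dB.getD nxt []) :: (node, tail) :: stk)
            (PySem.Set.add vis nxt, ord)) = _
      rw [hfn]
      show pvRunM dB f ((nxt, dB.getD nxt []) :: (node, tail) :: stk)
        (PySem.Set.add vis nxt, ord) = _
      rw [hadd, heq1, heq2, hdecomp]

-- pass-1 top level: the two folds over blocks produce identical (visited, order)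
theorem pvPass1 (dA dB : PySem.Dict Int (List Int)) (N : List Int)
    (HvA : ∀ b x, x ∈ dA.getD b [] → x ∈ N)
    (HvB : ∀ b x, x ∈ dB.getD b [] → x ∈ N)
    (hEq : ∀ b, dA.getD b [] = dB.getD b [])
    (fuelA : Nat) (HA : N.length < fuelA) (fuelB : Nat) (HB : 2 * N.length + 1 < fuelB) :
    ∀ (bs : List Int) (vis ord : List Int), (∀ b ∈ bs, b ∈ N) → vis.Nodup →
    bs.foldl (fun st bb => if bb ∈ st.1 then st else pvDfsA dA fuelA bb st) (vis, ord)
      = bs.foldl (fun st b => if b ∈ st.1 then st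
          else pvRunM dB fuelB [(b, dB.getD b [])] (PySem.Set.add st.1 b, st.2)) (vis, ord) ∧
    ∃ δv δo,
      bs.foldl (fun st bb => if bb ∈ st.1 then st else pvDfsA dA fuelA bb st) (vis, ord)
        = (vis ++ δv, ord ++ δo) ∧ δv.Perm δo ∧ (∀ x ∈ δv, x ∈ N) ∧ (vis ++ δv).Nodup ∧
      (∀ b ∈ bs, b ∈ vis ++ δv) := by
  intro bs
  induction bs with
  | nil =>
    intro vis ord _ hnd
    exact ⟨rfl, [], [], by simp, by simp, by simp, by simpa, by simp⟩
  | cons b bs ih =>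
    intro vis ord hbs hnd
    by_cases hb : b ∈ vis
    · have hstep : (if b ∈ (vis, ord).1 then (vis, ord) else pvDfsA dA fuelA b (vis, ord)) = (vis, ord) := if_pos hb
      have hstep' : (if b ∈ (vis, ord).1 then (vis, ord)
          else pvRunM dB fuelB [(b, dB.getD b [])] (PySem.Set.add (vis, ord).1 b, (vis, ord).2)) = (vis, ord) := if_pos hb
      rw [List.foldl_cons, List.foldl_cons, hstep, hstep']
      obtain ⟨he, δv, δo, hfold, hperm, hN, hnd', hmem⟩ :=
        ih vis ord (fun y hy => hbs y (by simp [hy])) hnd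
      exact ⟨he, δv, δo, hfold, hperm, hN, hnd', fun y hy => by
        rcases List.mem_cons.1 hy with rfl | h
        · simp [hb]
        · exact hmem y h⟩
    · have hbN : b ∈ N := hbs b (by simp)
      have hadd : PySem.Set.add vis b = vis ++ [b] := PySem.Set.add_of_not_mem hb
      have hlt := pvUnvis_append_lt N vis b hbN hb
      have hle := pvUnvis_le_length N vis
      have hnd1 : (vis ++ [b]).Nodup :=
        hnd.append (List.nodup_singleton b)
          (fun a ha hbb => hb (by rwa [List.mem_singleton.1 hbb] at ha))
      obtain ⟨f', _, heqM, _, _⟩ :=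
        pvRunM_sim dA dB N HvA HvB hEq fuelA HA fuelB b (dB.getD b []) [] (vis ++ [b]) ord
          (fun x hx => HvB b x hx) (by simp) hnd1 (by simp; omega)
      have hBstep : pvRunM dB fuelB [(b, dB.getD b [])] (PySem.Set.add vis b, ord)
          = pvDfsA dA fuelA b (vis, ord) := by
        rw [hadd, heqM, pvRunM_nil, ← hEq b,
          ← pvDfsA_eq_finish dA N HvA fuelA HA b vis ord hbN hb hnd]
      have hstep : (if b ∈ (vis, ord).1 then (vis, ord) else pvDfsA dA fuelA b (vis, ord))
          = pvDfsA dA fuelA b (vis, ord) := if_neg hb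
      have hstep' : (if b ∈ (vis, ord).1 then (vis, ord)
          else pvRunM dB fuelB [(b, dB.getD b [])] (PySem.Set.add (vis, ord).1 b, (vis, ord).2))
          = pvDfsA dA fuelA b (vis, ord) := by rw [if_neg hb]; exact hBstep
      rw [List.foldl_cons, List.foldl_cons, hstep, hstep']
      obtain ⟨δv, δo, hXe, hpermX, hbX, hNX, hndX⟩ :=
        pvDfsA_bundle dA N HvA fuelA b vis ord hbN hb hnd (by omega)
      rw [hXe]
      obtain ⟨he, δv', δo', hfold, hperm', hN', hnd'', hmem'⟩ :=
        ih (vis ++ δv) (ord ++ δo) (fun y hy => hbs y (by simp [hy])) hndX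
      refine ⟨he, δv ++ δv', δo ++ δo', by rw [hfold]; simp, hpermX.append hperm', ?_, ?_, ?_⟩
      · intro y hy; rcases List.mem_append.1 hy with h | h
        · exact hNX y h
        · exact hN' y h
      · simpa [List.append_assoc] using hnd''
      · intro y hy
        rcases List.mem_cons.1 hy with rfl | h
        · simp only [List.mem_append]
          right; left; exact hbX
        · have := hmem' y h
          simpa [List.append_assoc] using this

-- ===== pass 2: avoid-set reachability =====
def pvStepR (g : Int → List Int) (S : List Int) (a b : Int) : Prop := b ∈ g a ∧ b ∉ S

def pvRA (g : Int → List Int) (S : List Int) (r x : Int) : Prop :=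
  Relation.ReflTransGen (pvStepR g S) r x

theorem pvRA_anti (g : Int → List Int) (S S' : List Int) (h : ∀ x, x ∈ S → x ∈ S')
    (r x : Int) (hr : pvRA g S' r x) : pvRA g S r x := by
  induction hr with
  | refl => exact Relation.ReflTransGen.refl
  | tail _ hstep ih => exact ih.tail ⟨hstep.1, fun hc => hstep.2 (h _ hc)⟩

theorem pvRA_congr (g : Int → List Int) (S S' : List Int) (h : ∀ x, x ∈ S ↔ x ∈ S')
    (r x : Int) : pvRA g S r x ↔ pvRA g S' r x :=
  ⟨pvRA_anti g S' S (fun z hz => (h z).2 hz) r x, pvRA_anti g S S' (fun z hz => (h z).1 hz) r x⟩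

theorem pvRA_start_or_not_mem (g : Int → List Int) (S : List Int) (r x : Int)
    (h : pvRA g S r x) : x = r ∨ x ∉ S := by
  induction h with
  | refl => exact Or.inl rfl
  | tail _ hstep _ => exact Or.inr hstep.2

theorem pvRA_closed (g : Int → List Int) (S T : List Int) (r : Int)
    (hrT : r ∈ T) (hrS : r ∉ S)
    (hcl : ∀ u ∈ T, u ∉ S → ∀ v ∈ g u, v ∈ T) :
    ∀ x, pvRA g S r x → x ∈ T := by
  intro x h
  induction h with
  | refl => exact hrT
  | tail h1 hstep ih =>
    exact hcl _ ih
      (by rcases pvRA_start_or_not_mem g S r _ h1 with rfl | h; exacts [hrS, h]) _ hstep.1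

-- bundle for the recursive reverse DFS
theorem pvRdfsA_bundle (rd : PySem.Dict Int (List Int)) (N : List Int)
    (Hv : ∀ b x, x ∈ rd.getD b [] → x ∈ N) :
    ∀ (fuel : Nat) (node : Int) (vis acc : List Int),
      node ∈ N → node ∉ vis → vis.Nodup → pvUnvis N vis < fuel →
    ∃ δ, pvRdfsA rd fuel node (vis, acc) = (vis ++ δ, acc ++ δ) ∧
      (∃ δt, δ = node :: δt) ∧ (vis ++ δ).Nodup ∧ (∀ x ∈ δ, x ∈ N) ∧
      (∀ x ∈ δ, pvRA (fun b => rd.getD b []) vis node x) ∧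
      (∀ u ∈ δ, ∀ v ∈ rd.getD u [], v ∈ vis ++ δ) := by
  intro fuel
  induction fuel with
  | zero => intro node vis acc _ _ _ h; omega
  | succ fuel ih =>
    intro node vis acc hN hnv hnd hf
    have hadd : PySem.Set.add vis node = vis ++ [node] := PySem.Set.add_of_not_mem hnv
    have hnd1 : (vis ++ [node]).Nodup :=
      hnd.append (List.nodup_singleton node)
        (fun a ha hb => hnv (by rwa [List.mem_singleton.1 hb] at ha))
    have hlt := pvUnvis_append_lt N vis node hN hnv
    -- the inner fold over the reverse-neighbour list
    have haux :
        ∀ (l : List Int) (vis' acc' : List Int),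
          (∀ p ∈ l, p ∈ N) →
          (∀ p ∈ l, p ∉ vis → pvRA (fun b => rd.getD b []) vis node p) →
          (∀ x ∈ vis, x ∈ vis') → vis'.Nodup → pvUnvis N vis' < fuel →
          ∃ δ, l.foldl (fun acc prev => if prev ∈ acc.1 then acc else pvRdfsA rd fuel prev acc)
              (vis', acc') = (vis' ++ δ, acc' ++ δ) ∧
            (vis' ++ δ).Nodup ∧ (∀ x ∈ δ, x ∈ N) ∧
            (∀ x ∈ δ, pvRA (fun b => rd.getD b []) vis node x) ∧
            (∀ u ∈ δ, ∀ v ∈ rd.getD u [], v ∈ vis' ++ δ) ∧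
            (∀ p ∈ l, p ∈ vis' ++ δ) := by
      intro l
      induction l with
      | nil => intro vis' acc' _ _ _ hnd' _; exact ⟨[], by simp, by simpa, by simp, by simp, by simp, by simp⟩
      | cons p ps ihl =>
        intro vis' acc' hl hlRA hsub hnd' hf'
        by_cases hp : p ∈ vis'
        · rw [List.foldl_cons, if_pos hp]
          obtain ⟨δ, heq, hh1, hh2, hh3, hh4, hh5⟩ :=
            ihl vis' acc' (fun y hy => hl y (by simp [hy])) (fun y hy hyv => hlRA y (by simp [hy]) hyv)
              hsub hnd' hf'
          exact ⟨δ, heq, hh1, hh2, hh3, hh4, fun y hy => by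
            rcases List.mem_cons.1 hy with rfl | h
            · simp [hp]
            · exact hh5 y h⟩
        · rw [List.foldl_cons, if_neg hp]
          have hpN : p ∈ N := hl p (by simp)
          have hpRA : pvRA (fun b => rd.getD b []) vis node p :=
            hlRA p (by simp) (fun hc => hp (hsub p hc))
          obtain ⟨δ1, heq1, ⟨δt, hδt⟩, hnd2, hN2, hRA2, hcl2⟩ :=
            ih p vis' acc' hpN hp hnd' hf'
          rw [heq1]
          have hRA2' : ∀ x ∈ δ1, pvRA (fun b => rd.getD b []) vis node x := by
            intro x hx
            exact Relation.ReflTransGen.trans hpRA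
              (pvRA_anti (fun b => rd.getD b []) vis vis' hsub p x (hRA2 x hx))
          have hf2 : pvUnvis N (vis' ++ δ1) < fuel := by
            have : pvUnvis N (vis' ++ δ1) ≤ pvUnvis N vis' :=
              pvUnvis_mono N vis' (vis' ++ δ1) (fun y hy => by simp [hy])
            omega
          obtain ⟨δ2, heq2, hh1, hh2, hh3, hh4, hh5⟩ :=
            ihl (vis' ++ δ1) (acc' ++ δ1) (fun y hy => hl y (by simp [hy]))
              (fun y hy hyv => hlRA y (by simp [hy]) hyv)
              (fun x hx => by simp [hsub x hx]) hnd2 hf2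
          refine ⟨δ1 ++ δ2, by rw [heq2]; simp, by simpa [List.append_assoc] using hh1, ?_, ?_, ?_, ?_⟩
          · intro y hy; rcases List.mem_append.1 hy with h | h
            · exact hN2 y h
            · exact hh2 y h
          · intro y hy; rcases List.mem_append.1 hy with h | h
            · exact hRA2' y h
            · exact hh3 y h
          · intro u hu v hv
            rcases List.mem_append.1 hu with h | h
            · have := hcl2 u h v hv
              simp only [List.mem_append] at this ⊢
              tauto
            · have := hh4 u h v hv
              simpa [List.append_assoc] using this
          · intro y hy
            rcases List.mem_cons.1 hy with rfl | h
            · have : y ∈ δ1 := by rw [hδt]; simp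
              simp [this]
            · have := hh5 y h
              simpa [List.append_assoc] using this
    rw [pvRdfsA]
    simp only [hadd]
    obtain ⟨δ, heq, hnd2, hN2, hRA2, hcl2, hall⟩ :=
      haux (rd.getD node []) (vis ++ [node]) (acc ++ [node])
        (fun p hp => Hv node p hp)
        (fun p hp hpv => Relation.ReflTransGen.single ⟨hp, hpv⟩)
        (fun x hx => by simp [hx]) hnd1 (by omega)
    refine ⟨node :: δ, ?_, ⟨δ, rfl⟩, ?_, ?_, ?_, ?_⟩
    · rw [heq]; simp
    · simpa [List.append_assoc] using hnd2
    · intro y hy; rcases List.mem_cons.1 hy with rfl | h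
      · exact hN
      · exact hN2 y h
    · intro y hy; rcases List.mem_cons.1 hy with rfl | h
      · exact Relation.ReflTransGen.refl
      · exact hRA2 y h
    · intro u hu v hv
      rcases List.mem_cons.1 hu with rfl | h
      · have := hall v hv
        simpa [List.append_assoc] using this
      · have := hcl2 u h v hv
        simpa [List.append_assoc] using this

-- exact unvisited count bookkeeping (N without duplicates)
theorem pvUnvis_snoc_eq (N vis : List Int) (b : Int) (hNd : N.Nodup) (hb : b ∈ N) (hnb : b ∉ vis) :
    pvUnvis N (vis ++ [b]) + 1 = pvUnvis N vis := by
  have hf : N.filter (fun x => decide (x ∉ vis ++ [b]))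
      = (N.filter (fun x => decide (x ∉ vis))).filter (fun x => x != b) := by
    rw [List.filter_filter]
    apply List.filter_congr
    intro x _
    by_cases h1 : x ∈ vis <;> by_cases h2 : x = b <;> simp [h1, h2]
  have hM : (N.filter (fun x => decide (x ∉ vis))).Nodup := hNd.filter _
  have hbM : b ∈ N.filter (fun x => decide (x ∉ vis)) := by simp [List.mem_filter, hb, hnb]
  have herase : (N.filter (fun x => decide (x ∉ vis))).filter (fun x => x != b)
      = (N.filter (fun x => decide (x ∉ vis))).erase b := (hM.erase_eq_filter b).symm
  simp only [pvUnvis, hf, herase]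
  rw [List.length_erase_of_mem hbM]
  have : 0 < (N.filter (fun x => decide (x ∉ vis))).length := List.length_pos_of_mem hbM
  omega

theorem pvUnvis_append_eq (N : List Int) (hNd : N.Nodup) :
    ∀ (δ vis : List Int), (∀ x ∈ δ, x ∈ N) → (vis ++ δ).Nodup →
    pvUnvis N (vis ++ δ) + δ.length = pvUnvis N vis := by
  intro δ
  induction δ with
  | nil => intro vis _ _; simp
  | cons b bs ih =>
    intro vis hδ hnd
    have hb : b ∉ vis := by
      intro hc
      have := List.disjoint_of_nodup_append hnd
      exact this hc (by simp)
    have h1 : pvUnvis N (vis ++ [b]) + 1 = pvUnvis N vis :=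
      pvUnvis_snoc_eq N vis b hNd (hδ b (by simp)) hb
    have h2 := ih (vis ++ [b]) (fun y hy => hδ y (by simp [hy])) (by simpa using hnd)
    have : vis ++ b :: bs = (vis ++ [b]) ++ bs := by simp
    rw [this, List.length_cons]
    omega

theorem pvRunR_nil (pd : PySem.Dict Int (List Int)) (fuel : Nat)
    (st : PySem.Set Int × Int × PySem.Set Int) : pvRunR pd fuel [] st = st := by
  cases fuel <;> rfl

-- the iterative reverse sweep of B
theorem pvRunR_spec (pd : PySem.Dict Int (List Int)) (N : List Int) (hNd : N.Nodup)
    (Hv : ∀ b x, x ∈ pd.getD b [] → x ∈ N) (S : List Int) (root : Int) :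
    ∀ (fuel : Nat) (stk : List Int) (vis : List Int) (size : Int) (loopy : List Int),
      (∀ x ∈ stk, x ∈ vis) → (∀ x ∈ stk, x ∉ S) → vis.Nodup →
      (∀ x ∈ vis, x ∈ S ∨ (x ∈ N ∧ pvRA (fun b => pd.getD b []) S root x)) →
      (∀ u ∈ vis, u ∉ S → u ∈ stk ∨ ∀ v ∈ pd.getD u [], v ∈ vis) →
      (∀ x, x ∈ S → x ∈ vis) → (∀ x ∈ loopy, x ∈ vis) →
      stk.length + pvUnvis N vis < fuel →
      ∃ δ, pvRunR pd fuel stk (vis, size, loopy) = (vis ++ δ, size + δ.length, loopy ++ δ) ∧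
        (vis ++ δ).Nodup ∧ (∀ x ∈ δ, x ∈ N ∧ pvRA (fun b => pd.getD b []) S root x) ∧
        (∀ u ∈ vis ++ δ, u ∉ S → ∀ v ∈ pd.getD u [], v ∈ vis ++ δ) := by
  intro fuel
  induction fuel with
  | zero => intro stk vis size loopy _ _ _ _ _ _ _ h; omega
  | succ fuel ih =>
    intro stk vis size loopy h1 h2 h3 h4 h5 h8 h9 h7
    cases stk with
    | nil =>
      refine ⟨[], by simp [pvRunR_nil], by simpa, by simp, ?_⟩
      intro u hu huS v hv
      rcases h5 u (by simpa using hu) huS with h | h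
      · simp at h
      · simpa using h v hv
    | cons node stk' =>
      have hnodev : node ∈ vis := h1 node (by simp)
      have hnodeS : node ∉ S := h2 node (by simp)
      have hnodeRA : pvRA (fun b => pd.getD b []) S root node := by
        rcases h4 node hnodev with h | h
        · exact absurd h hnodeS
        · exact h.2
      -- inner fold over pd.getD node []
      have haux : ∀ (l : List Int) (stk0 : List Int) (vis0 : List Int) (size0 : Int)
          (loopy0 : List Int),
          (∀ p ∈ l, p ∈ N) →
          (∀ p ∈ l, p ∉ S → pvRA (fun b => pd.getD b []) S root p) →
          vis0.Nodup → (∀ x ∈ loopy0, x ∈ vis0) → (∀ x, x ∈ S → x ∈ vis0) →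
          ∃ δ1, l.foldl (fun (acc : List Int × PySem.Set Int × Int × PySem.Set Int) p =>
              if p ∈ acc.2.1 then acc
              else (p :: acc.1, PySem.Set.add acc.2.1 p, acc.2.2.1 + 1, PySem.Set.add acc.2.2.2 p))
              (stk0, (vis0, size0, loopy0))
            = (δ1.reverse ++ stk0, vis0 ++ δ1, size0 + δ1.length, loopy0 ++ δ1) ∧
            (vis0 ++ δ1).Nodup ∧ (∀ x ∈ δ1, x ∈ N ∧ pvRA (fun b => pd.getD b []) S root x) ∧
            (∀ p ∈ l, p ∈ vis0 ++ δ1) := by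
        intro l
        induction l with
        | nil => intro stk0 vis0 size0 loopy0 _ _ hnd0 _ _
                 exact ⟨[], by simp, by simpa, by simp, by simp⟩
        | cons p ps ihl =>
          intro stk0 vis0 size0 loopy0 hl hlRA hnd0 hlv0 hSv0
          by_cases hp : p ∈ vis0
          · rw [List.foldl_cons, if_pos hp]
            obtain ⟨δ1, heq, ha, hb, hc⟩ :=
              ihl stk0 vis0 size0 loopy0 (fun y hy => hl y (by simp [hy]))
                (fun y hy => hlRA y (by simp [hy])) hnd0 hlv0 hSv0
            exact ⟨δ1, heq, ha, hb, fun y hy => by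
              rcases List.mem_cons.1 hy with rfl | h
              · simp [hp]
              · exact hc y h⟩
          · rw [List.foldl_cons, if_neg hp]
            have hpN : p ∈ N := hl p (by simp)
            have hpS : p ∉ S := fun hc => hp (hSv0 p hc)
            have hpRA := hlRA p (by simp) hpS
            have hpl : p ∉ loopy0 := fun hc => hp (hlv0 p hc)
            have haddv : PySem.Set.add vis0 p = vis0 ++ [p] := PySem.Set.add_of_not_mem hp
            have haddl : PySem.Set.add loopy0 p = loopy0 ++ [p] := PySem.Set.add_of_not_mem hpl
            have hnd0' : (vis0 ++ [p]).Nodup :=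
              hnd0.append (List.nodup_singleton p)
                (fun a ha hb => hp (by rwa [List.mem_singleton.1 hb] at ha))
            obtain ⟨δ1, heq, ha, hb, hc⟩ :=
              ihl (p :: stk0) (vis0 ++ [p]) (size0 + 1) (loopy0 ++ [p])
                (fun y hy => hl y (by simp [hy])) (fun y hy => hlRA y (by simp [hy]))
                hnd0' (fun x hx => by rcases List.mem_append.1 hx with h | h
                                      · simp [hlv0 x h]
                                      · simp [h])
                (fun x hx => by simp [hSv0 x hx])
            refine ⟨p :: δ1, ?_, ?_, ?_, ?_⟩
            · rw [haddv, haddl, heq]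
              refine Prod.ext ?_ (Prod.ext ?_ (Prod.ext ?_ ?_)) <;> simp
              · omega
            · simpa [List.append_assoc] using ha
            · intro y hy; rcases List.mem_cons.1 hy with rfl | h
              · exact ⟨hpN, hpRA⟩
              · exact (hb y h)
            · intro y hy
              rcases List.mem_cons.1 hy with rfl | h
              · simp
              · have := hc y h
                simp only [List.mem_append, List.mem_cons] at this ⊢
                tauto
      obtain ⟨δ1, heq1, hnd1, hprops1, hall1⟩ :=
        haux (pd.getD node []) stk' vis size loopy
          (fun p hp => Hv node p hp)
          (fun p hp hpS => hnodeRA.tail ⟨hp, hpS⟩)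
          h3 h9 h8
      have hδ1N : ∀ x ∈ δ1, x ∈ N := fun x hx => (hprops1 x hx).1
      have hcount : pvUnvis N (vis ++ δ1) + δ1.length = pvUnvis N vis :=
        pvUnvis_append_eq N hNd δ1 vis hδ1N hnd1
      have hδ1nv : ∀ x ∈ δ1, x ∉ vis := by
        intro x hx hc
        exact (List.disjoint_of_nodup_append hnd1) hc hx
      rw [pvRunR, heq1]
      obtain ⟨δ2, heq2, hnd2, hprops2, hcl2⟩ :=
        ih (δ1.reverse ++ stk') (vis ++ δ1) (size + δ1.length) (loopy ++ δ1)
          (by intro x hx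
              rcases List.mem_append.1 hx with h | h
              · simp [List.mem_append, List.mem_reverse.1 h]
              · simp [h1 x (by simp [h])])
          (by intro x hx
              rcases List.mem_append.1 hx with h | h
              · have hx1 := List.mem_reverse.1 h
                intro hc
                exact (hδ1nv x hx1) (h8 x hc)
              · exact h2 x (by simp [h]))
          hnd1
          (by intro x hx
              rcases List.mem_append.1 hx with h | h
              · exact h4 x h
              · exact Or.inr (hprops1 x h))
          (by intro u hu huS
              rcases List.mem_append.1 hu with h | h
              · rcases h5 u h huS with h' | h'
                · rcases List.mem_cons.1 h' with rfl | h''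
                  · right; intro v hv; exact hall1 v hv
                  · left; simp [h'']
                · right; intro v hv; simp [h' v hv]
              · left; simp [List.mem_reverse, h])
          (fun x hx => by simp [h8 x hx])
          (by intro x hx
              rcases List.mem_append.1 hx with h | h
              · simp [h9 x h]
              · simp [h])
          (by have := hcount
              simp only [List.length_append, List.length_reverse]
              simp only [List.length_cons] at h7
              omega)
      refine ⟨δ1 ++ δ2, ?_, by simpa [List.append_assoc] using hnd2, ?_, ?_⟩
      · rw [heq2]
        refine Prod.ext ?_ (Prod.ext ?_ ?_) <;> simp
        · omega
      · intro y hy; rcases List.mem_append.1 hy with h | h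
        · exact hprops1 y h
        · exact hprops2 y h
      · intro u hu huS v hv
        have hu' : u ∈ (vis ++ δ1) ++ δ2 := by simpa [List.append_assoc] using hu
        have := hcl2 u hu' huS v hv
        simpa [List.append_assoc] using this

-- qualification of a component for the loopy set
def pvQual (slB : List Int) (c : List Int) : Bool :=
  decide (1 < c.length) || (decide (c.length = 1) && decide (c.head?.getD 0 ∈ slB))

theorem pvQual_of_one_lt (slB : List Int) (c : List Int) (h : 1 < c.length) :
    pvQual slB c = true := by simp [pvQual]; omega

theorem pvQual_singleton (slB : List Int) (c0 : Int) :
    pvQual slB [c0] = true ↔ c0 ∈ slB := by simp [pvQual]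

-- pass-2 top level: A's component collection vs B's loopy sweep
theorem pvPass2 (rdA pdB : PySem.Dict Int (List Int)) (slB : List Int) (N : List Int)
    (hNd : N.Nodup)
    (HvA : ∀ b x, x ∈ rdA.getD b [] → x ∈ N)
    (HvB : ∀ b x, x ∈ pdB.getD b [] → x ∈ N)
    (hEqR : ∀ b, rdA.getD b [] = pdB.getD b [])
    (fuelA : Nat) (HA : N.length < fuelA) (fuelB : Nat) (HB : N.length + 1 < fuelB) :
    ∀ (os : List Int) (visA : List Int) (comps : List (List Int)) (visB loopy : List Int),
      (∀ b ∈ os, b ∈ N) →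
      (∀ x, x ∈ visA ↔ x ∈ visB) →
      visA.Nodup → visB.Nodup →
      (∀ x ∈ loopy, x ∈ visB) →
      (∀ x, x ∈ loopy ↔ ∃ c ∈ comps, x ∈ c ∧ pvQual slB c = true) →
      (∀ c ∈ comps, ∀ x ∈ c, x ∈ N) →
      (∀ c ∈ comps, c ≠ []) →
      comps.flatten = visA →
      (let A := os.foldl (fun (st : PySem.Set Int × List (List Int)) bb =>
          if bb ∈ st.1 then st
          else ((pvRdfsA rdA fuelA bb (st.1, [])).1,
                st.2 ++ [(pvRdfsA rdA fuelA bb (st.1, [])).2])) (visA, comps)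
       let B := os.foldl (fun (st : PySem.Set Int × PySem.Set Int) r =>
          if r ∈ st.1 then st
          else ((pvRunR pdB fuelB [r] (PySem.Set.add st.1 r, 1, st.2)).1,
                if 1 < (pvRunR pdB fuelB [r] (PySem.Set.add st.1 r, 1, st.2)).2.1 then
                  PySem.Set.add (pvRunR pdB fuelB [r] (PySem.Set.add st.1 r, 1, st.2)).2.2 r
                else if r ∈ slB then
                  PySem.Set.add (pvRunR pdB fuelB [r] (PySem.Set.add st.1 r, 1, st.2)).2.2 r
                else (pvRunR pdB fuelB [r] (PySem.Set.add st.1 r, 1, st.2)).2.2)) (visB, loopy)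
       (∀ x, x ∈ B.2 ↔ ∃ c ∈ A.2, x ∈ c ∧ pvQual slB c = true) ∧
       (∀ c ∈ A.2, ∀ x ∈ c, x ∈ N) ∧ (∀ c ∈ A.2, c ≠ []) ∧
       A.2.flatten.Nodup ∧ (∀ b ∈ os, b ∈ A.2.flatten) ∧
       A.2.flatten = A.1 ∧ (∀ x ∈ visA, x ∈ A.1)) := by
  intro os
  induction os with
  | nil =>
    intro visA comps visB loopy _ hv hndA _ _ hinv hcN hcne hjoin
    refine ⟨by simpa using hinv, by simpa using hcN, by simpa using hcne, ?_, by simp, by simpa using hjoin, by simp⟩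
    simpa [hjoin] using hndA
  | cons b os ih =>
    intro visA comps visB loopy hos hv hndA hndB hloopy hinv hcN hcne hjoin
    simp only [List.foldl_cons]
    by_cases hbA : b ∈ visA
    · have hbB : b ∈ visB := (hv b).1 hbA
      rw [if_pos (show b ∈ (visA, comps).1 from hbA), if_pos (show b ∈ (visB, loopy).1 from hbB)]
      obtain ⟨c1, c2, c3, c4, c5, c6, c7⟩ := ih visA comps visB loopy
        (fun y hy => hos y (by simp [hy])) hv hndA hndB hloopy hinv hcN hcne hjoin
      refine ⟨c1, c2, c3, c4, ?_, c6, c7⟩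
      intro y hy
      rcases List.mem_cons.1 hy with rfl | h
      · rw [c6]; exact c7 y hbA
      · exact c5 y h
    · have hbB : b ∉ visB := fun hc => hbA ((hv b).2 hc)
      have hbN : b ∈ N := hos b (by simp)
      rw [if_neg (show ¬ b ∈ (visA, comps).1 from hbA), if_neg (show ¬ b ∈ (visB, loopy).1 from hbB)]
      -- A side: recursive reverse DFS bundle
      obtain ⟨δA, heqA, ⟨δAt, hδAt⟩, hndA', hNA, hRAA, hclA⟩ :=
        pvRdfsA_bundle rdA N HvA fuelA b visA [] hbN hbA hndA
          (by have := pvUnvis_le_length N visA; omega)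
      -- B side: iterative sweep
      have haddB : PySem.Set.add visB b = visB ++ [b] := PySem.Set.add_of_not_mem hbB
      have hndB1 : (visB ++ [b]).Nodup :=
        hndB.append (List.nodup_singleton b)
          (fun a ha hb2 => hbB (by rwa [List.mem_singleton.1 hb2] at ha))
      obtain ⟨δB, heqB, hndB', hpropsB, hclB⟩ :=
        pvRunR_spec pdB N hNd HvB visB b fuelB [b] (visB ++ [b]) 1 loopy
          (by simp) (by simpa using hbB) hndB1
          (by intro x hx
              rcases List.mem_append.1 hx with h | h
              · exact Or.inl h
              · exact Or.inr ⟨by simpa [List.mem_singleton.1 h] using hbN,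
                  by rw [List.mem_singleton.1 h]; exact Relation.ReflTransGen.refl⟩)
          (by intro u hu huS
              rcases List.mem_append.1 hu with h | h
              · exact absurd h huS
              · exact Or.inl (by simpa using h))
          (fun x hx => by simp [hx])
          (fun x hx => by simp [hloopy x hx])
          (by have h1 : pvUnvis N (visB ++ [b]) ≤ pvUnvis N visB :=
                pvUnvis_mono N visB (visB ++ [b]) (fun y hy => by simp [hy])
              have h2 := pvUnvis_le_length N visB
              simp only [List.length_cons, List.length_nil]
              omega)
      -- identify the两 reachability predicates
      have hgeq : (fun b => pdB.getD b []) = (fun b => rdA.getD b []) :=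
        funext fun b => (hEqR b).symm
      rw [hgeq] at hpropsB
      have hRAcongr : ∀ x, pvRA (fun b => rdA.getD b []) visA b x ↔
          pvRA (fun b => rdA.getD b []) visB b x :=
        fun x => pvRA_congr _ visA visB hv b x
      -- member equality of the two new visited sets
      have hmemAB : ∀ x, x ∈ visA ++ δA ↔ x ∈ (visB ++ [b]) ++ δB := by
        intro x
        constructor
        · intro hx
          rcases List.mem_append.1 hx with h | h
          · simp [List.mem_append, (hv x).1 h]
          · have hra : pvRA (fun b => rdA.getD b []) visB b x :=
              (hRAcongr x).1 (hRAA x h)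
            exact pvRA_closed _ visB ((visB ++ [b]) ++ δB) b (by simp) hbB
              (fun u hu huS v hv' => hclB u hu huS v (by rwa [hEqR u] at hv')) x hra
        · intro hx
          rcases List.mem_append.1 hx with h | h
          · rcases List.mem_append.1 h with h' | h'
            · simp [List.mem_append, (hv x).2 h']
            · have : x = b := List.mem_singleton.1 h'
              subst this
              simp [List.mem_append, hδAt]
          · have hra : pvRA (fun b => rdA.getD b []) visA b x :=
              (hRAcongr x).2 (hpropsB x h).2
            refine pvRA_closed _ visA (visA ++ δA) b (by simp [hδAt]) hbA ?_ x hra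
            intro u hu huS v hv'
            rcases List.mem_append.1 hu with h' | h'
            · exact absurd h' huS
            · exact hclA u h' v hv'
      -- δA is exactly b :: δB up to permutation
      have hδAnodup : δA.Nodup := (List.nodup_append.1 hndA').2.1
      have hδBnodup : δB.Nodup := (List.nodup_append.1 hndB').2.1
      have hbnδB : b ∉ δB := by
        intro hc
        have := List.disjoint_of_nodup_append hndB'
        exact this (by simp) hc
      have hpermA : δA.Perm (b :: δB) := by
        rw [List.perm_ext_iff_of_nodup hδAnodup (by simp [List.nodup_cons, hbnδB, hδBnodup])]
        intro y
        have hdisjA := List.disjoint_of_nodup_append hndA'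
        have hdisjB := List.disjoint_of_nodup_append hndB'
        constructor
        · intro hy
          have hyA : y ∈ visA ++ δA := by simp [hy]
          have := (hmemAB y).1 hyA
          have hynA : y ∉ visA := fun hc => hdisjA hc hy
          have hynB : y ∉ visB := fun hc => hynA ((hv y).2 hc)
          rcases List.mem_append.1 this with h | h
          · rcases List.mem_append.1 h with h' | h'
            · exact absurd h' hynB
            · simp [List.mem_singleton.1 h']
          · simp [h]
        · intro hy
          have hyB : y ∈ (visB ++ [b]) ++ δB := by
            rcases List.mem_cons.1 hy with rfl | h
            · simp
            · simp [h]
          have := (hmemAB y).2 hyB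
          have hynB : y ∉ visB := by
            rcases List.mem_cons.1 hy with rfl | h
            · exact hbB
            · exact fun hc => hdisjB (by simp [hc]) h
          have hynA : y ∉ visA := fun hc => hynB ((hv y).1 hc)
          rcases List.mem_append.1 this with h | h
          · exact absurd h hynA
          · exact h
      have hlen : δA.length = δB.length + 1 := by
        have := hpermA.length_eq; simpa using this
      -- the new loopy set
      set q := pvRunR pdB fuelB [b] (PySem.Set.add visB b, 1, loopy) with hq
      have hqval : q = ((visB ++ [b]) ++ δB, 1 + (δB.length : Int), loopy ++ δB) := by
        rw [hq, haddB, heqB]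
      have hloopyδB : ∀ x ∈ loopy ++ δB, x ∈ (visB ++ [b]) ++ δB := by
        intro x hx
        rcases List.mem_append.1 hx with h | h
        · simp [hloopy x h, List.mem_append]
        · simp [h]
      have hbnloopy : b ∉ loopy ++ δB := by
        intro hc
        rcases List.mem_append.1 hc with h | h
        · exact hbB (hloopy b h)
        · exact hbnδB h
      -- case split on the size test
      by_cases hsz : 0 < δB.length
      · have hc1 : (1 : Int) < q.2.1 := by rw [hqval]; simp; omega
        have hQ : pvQual slB δA = true := pvQual_of_one_lt slB δA (by omega)
        have hnewloopy : (if 1 < q.2.1 then PySem.Set.add q.2.2 b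
            else if b ∈ slB then PySem.Set.add q.2.2 b else q.2.2) = (loopy ++ δB) ++ [b] := by
          rw [if_pos hc1, hqval]
          exact PySem.Set.add_of_not_mem hbnloopy
        have hinv' : ∀ x, x ∈ (loopy ++ δB) ++ [b] ↔
            ∃ c ∈ comps ++ [δA], x ∈ c ∧ pvQual slB c = true := by
          intro x
          simp only [List.mem_append, List.mem_singleton]
          constructor
          · rintro ((h | h) | rfl)
            · obtain ⟨c, hc, hxc, hq'⟩ := (hinv x).1 h
              exact ⟨c, Or.inl hc, hxc, hq'⟩
            · exact ⟨δA, Or.inr (by simp), hpermA.mem_iff.2 (by simp [h]), hQ⟩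
            · exact ⟨δA, Or.inr (by simp), hpermA.mem_iff.2 (by simp), hQ⟩
          · rintro ⟨c, hc, hxc, hq'⟩
            rcases hc with hc | hc
            · exact Or.inl (Or.inl ((hinv x).2 ⟨c, hc, hxc, hq'⟩))
            · have : c = δA := by simpa using hc
              subst this
              have := hpermA.mem_iff.1 hxc
              rcases List.mem_cons.1 this with rfl | h
              · exact Or.inr rfl
              · exact Or.inl (Or.inr h)
        have hA1 : (pvRdfsA rdA fuelA b (visA, [])).1 = visA ++ δA := by rw [heqA]
        have hA2 : (pvRdfsA rdA fuelA b (visA, [])).2 = δA := by rw [heqA]; simp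
        have hq1 : q.1 = (visB ++ [b]) ++ δB := by rw [hqval]
        rw [hA1, hA2, hnewloopy, hq1]
        obtain ⟨c1, c2, c3, c4, c5, c6, c7⟩ :=
          ih (visA ++ δA) (comps ++ [δA]) ((visB ++ [b]) ++ δB) ((loopy ++ δB) ++ [b])
          (fun y hy => hos y (by simp [hy])) hmemAB hndA' hndB'
          (by intro x hx
              rcases List.mem_append.1 hx with h | h
              · exact hloopyδB x h
              · simp [List.mem_singleton.1 h, List.mem_append])
          hinv'
          (by intro c hc x hx
              rcases List.mem_append.1 hc with h | h
              · exact hcN c h x hx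
              · rw [List.mem_singleton.1 h] at hx; exact hNA x hx)
          (by intro c hc
              rcases List.mem_append.1 hc with h | h
              · exact hcne c h
              · rw [List.mem_singleton.1 h, hδAt]; simp)
          (by simp [hjoin])
        refine ⟨c1, c2, c3, c4, ?_, c6, ?_⟩
        · intro y hy
          rcases List.mem_cons.1 hy with rfl | h
          · rw [c6]; exact c7 y (by simp [hδAt])
          · exact c5 y h
        · intro x hx
          exact c7 x (by simp [hx])
      · have hδBnil : δB = [] := by
          cases δB with
          | nil => rfl
          | cons a l => simp at hsz
        have hδAsing : δA = [b] := by
          have := hpermA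
          rw [hδBnil] at this
          exact List.perm_singleton.1 this
        have hc1 : ¬ (1 : Int) < q.2.1 := by rw [hqval, hδBnil]; simp
        have hQiff : pvQual slB δA = true ↔ b ∈ slB := by
          rw [hδAsing, pvQual_singleton]
        have hnewloopy : (if 1 < q.2.1 then PySem.Set.add q.2.2 b
            else if b ∈ slB then PySem.Set.add q.2.2 b else q.2.2)
            = if b ∈ slB then loopy ++ [b] else loopy := by
          rw [if_neg hc1, hqval, hδBnil]
          by_cases hbsl : b ∈ slB
          · rw [if_pos hbsl, if_pos hbsl]
            show PySem.Set.add (loopy ++ []) b = loopy ++ [b]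
            rw [List.append_nil]
            exact PySem.Set.add_of_not_mem (fun hc => hbnloopy (List.mem_append.2 (Or.inl hc)))
          · rw [if_neg hbsl, if_neg hbsl]; simp
        have hinv' : ∀ x, x ∈ (if b ∈ slB then loopy ++ [b] else loopy) ↔
            ∃ c ∈ comps ++ [δA], x ∈ c ∧ pvQual slB c = true := by
          intro x
          by_cases hbsl : b ∈ slB
          · rw [if_pos hbsl]
            simp only [List.mem_append, List.mem_singleton]
            constructor
            · rintro (h | rfl)
              · obtain ⟨c, hc, hxc, hq'⟩ := (hinv x).1 h
                exact ⟨c, Or.inl hc, hxc, hq'⟩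
              · exact ⟨δA, Or.inr (by simp), by simp [hδAsing], hQiff.2 hbsl⟩
            · rintro ⟨c, hc, hxc, hq'⟩
              rcases hc with hc | hc
              · exact Or.inl ((hinv x).2 ⟨c, hc, hxc, hq'⟩)
              · have : c = δA := by simpa using hc
                subst this
                rw [hδAsing] at hxc
                exact Or.inr (List.mem_singleton.1 hxc)
          · rw [if_neg hbsl]
            constructor
            · intro h
              obtain ⟨c, hc, hxc, hq'⟩ := (hinv x).1 h
              exact ⟨c, by simp [hc], hxc, hq'⟩
            · rintro ⟨c, hc, hxc, hq'⟩
              rcases List.mem_append.1 hc with hc | hc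
              · exact (hinv x).2 ⟨c, hc, hxc, hq'⟩
              · have : c = δA := by simpa using hc
                subst this
                exact absurd hq' (fun h => hbsl (hQiff.1 h))
        have hA1 : (pvRdfsA rdA fuelA b (visA, [])).1 = visA ++ δA := by rw [heqA]
        have hA2 : (pvRdfsA rdA fuelA b (visA, [])).2 = δA := by rw [heqA]; simp
        have hq1 : q.1 = (visB ++ [b]) ++ δB := by rw [hqval]
        rw [hA1, hA2, hnewloopy, hq1]
        obtain ⟨c1, c2, c3, c4, c5, c6, c7⟩ :=
          ih (visA ++ δA) (comps ++ [δA]) ((visB ++ [b]) ++ δB)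
          (if b ∈ slB then loopy ++ [b] else loopy)
          (fun y hy => hos y (by simp [hy])) hmemAB hndA' hndB'
          (by intro x hx
              by_cases hbsl : b ∈ slB
              · rw [if_pos hbsl] at hx
                rcases List.mem_append.1 hx with h | h
                · simp [hloopy x h, List.mem_append]
                · simp [List.mem_singleton.1 h, List.mem_append]
              · rw [if_neg hbsl] at hx
                simp [hloopy x hx, List.mem_append])
          hinv'
          (by intro c hc x hx
              rcases List.mem_append.1 hc with h | h
              · exact hcN c h x hx
              · rw [List.mem_singleton.1 h] at hx; exact hNA x hx)
          (by intro c hc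
              rcases List.mem_append.1 hc with h | h
              · exact hcne c h
              · rw [List.mem_singleton.1 h, hδAt]; simp)
          (by simp [hjoin])
        refine ⟨c1, c2, c3, c4, ?_, c6, ?_⟩
        · intro y hy
          rcases List.mem_cons.1 hy with rfl | h
          · rw [c6]; exact c7 y (by simp [hδAt])
          · exact c5 y h
        · intro x hx
          exact c7 x (by simp [hx])

-- ===== dictionary bridges =====
theorem pvGetD_foldl_insert_const {ν : Type} (bs : List Int) (d : PySem.Dict Int ν) (c : ν)
    (x : Int) (h : d.getD x c = c) :
    (bs.foldl (fun d b => d.insert b c) d).getD x c = c := by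
  induction bs generalizing d with
  | nil => simpa
  | cons b bs ih =>
    rw [List.foldl_cons]
    exact ih (d.insert b c) (by rw [PySem.Dict.getD_insert]; split <;> simp [h])

theorem pvGetD_foldl_insert_key {ν : Type} (ks : List Int) (f : Int → ν)
    (d : PySem.Dict Int ν) (d0 : ν) (x : Int) :
    (ks.foldl (fun d b => d.insert b (f b)) d).getD x d0
      = if x ∈ ks then f x else d.getD x d0 := by
  induction ks generalizing d with
  | nil => simp
  | cons b bs ih =>
    rw [List.foldl_cons, ih]
    by_cases hx : x ∈ bs
    · simp [hx]
    · rw [if_neg hx, PySem.Dict.getD_insert]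
      by_cases hxb : x = b <;> simp [hxb, hx]

theorem pvKeys_foldl_insert_const {ν : Type} (bs : List Int) (c : ν) :
    (bs.foldl (fun d b => d.insert b c) PySem.Dict.empty).keys = PySem.Set.ofList bs := by
  rw [PySem.Dict.keys_foldl_insert]
  simp [PySem.Set.update, PySem.Set.ofList_eq_foldl, PySem.Dict.keys_empty]

-- the three-dict edge loop decouples into three independent folds over the filtered edges
theorem pvEdgeFold (N : List Int) :
    ∀ (es : List (Int × Int)) (a r : PySem.Dict Int (List Int)) (s : PySem.Dict Int Bool),
      a.keys = N →
      es.foldl (fun (t : PySem.Dict Int (List Int) × PySem.Dict Int (List Int) × PySem.Dict Int Bool) e =>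
          if !(t.1.contains e.1) || !(t.1.contains e.2) then t
          else (t.1.modify e.1 [] (· ++ [e.2]), t.2.1.modify e.2 [] (· ++ [e.1]),
                if e.1 = e.2 then t.2.2.insert e.1 true else t.2.2)) (a, r, s)
      = ((es.filter (fun e => decide (e.1 ∈ N) && decide (e.2 ∈ N))).foldl
            (fun d e => d.modify e.1 [] (· ++ [e.2])) a,
         (es.filter (fun e => decide (e.1 ∈ N) && decide (e.2 ∈ N))).foldl
            (fun d e => d.modify e.2 [] (· ++ [e.1])) r,
         (es.filter (fun e => decide (e.1 ∈ N) && decide (e.2 ∈ N))).foldl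
            (fun d e => if e.1 = e.2 then d.insert e.1 true else d) s) := by
  intro es
  induction es with
  | nil => intro a r s _; simp
  | cons e es ih =>
    intro a r s hka
    rw [List.foldl_cons, List.filter_cons]
    have hcont : ∀ y, a.contains y = decide (y ∈ N) := by
      intro y
      rw [PySem.Dict.contains_eq_decide_mem_keys, hka]
    by_cases h1 : e.1 ∈ N <;> by_cases h2 : e.2 ∈ N
    · have hguard : (!(a.contains e.1) || !(a.contains e.2)) = false := by
        rw [hcont, hcont]; simp [h1, h2]
      rw [hguard]
      have : (decide (e.1 ∈ N) && decide (e.2 ∈ N)) = true := by simp [h1, h2]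
      rw [this]
      simp only [if_false, Bool.false_eq_true]
      refine ih _ _ _ ?_
      have hc1 : a.contains e.1 = true := by rw [hcont]; simp [h1]
      rw [PySem.Dict.keys_modify, PySem.Dict.keys_insert_of_contains _ _ hc1, hka]
    all_goals {
      have hguard : (!(a.contains e.1) || !(a.contains e.2)) = true := by
        rw [hcont, hcont]; simp [h1, h2]
      rw [hguard]
      have : (decide (e.1 ∈ N) && decide (e.2 ∈ N)) = false := by simp [h1, h2]
      rw [this]
      simp only [if_true, Bool.false_eq_true, if_false]
      exact ih a r s hka
    }

-- the self-loop dict reads back as membership of the self-loop source list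
theorem pvSlFold (es : List (Int × Int)) :
    ∀ (s : PySem.Dict Int Bool) (c : Int),
      ((es.foldl (fun d e => if e.1 = e.2 then d.insert e.1 true else d) s).getD c false = true
       ↔ (s.getD c false = true ∨ c ∈ (es.filter (fun e => e.1 == e.2)).map (·.1))) := by
  induction es with
  | nil => intro s c; simp
  | cons e es ih =>
    intro s c
    rw [List.foldl_cons, List.filter_cons]
    by_cases he : e.1 = e.2
    · rw [if_pos he]
      have : (e.1 == e.2) = true := by simp [he]
      rw [this, ih]
      rw [PySem.Dict.getD_insert]
      by_cases hc : c = e.1 <;> simp [hc]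
    · rw [if_neg he]
      have hb : (e.1 == e.2) = false := by simp [he]
      rw [hb, ih]
      simp

-- ===== the depth fold over components =====
theorem pvDepthStepKeys (slA : PySem.Dict Int Bool) (N : List Int)
    (comps : List (List Int)) :
    ∀ (d : PySem.Dict Int Int), d.keys = N → (∀ c ∈ comps, ∀ x ∈ c, x ∈ N) →
    (comps.foldl (fun d comp =>
        if 1 < comp.length then comp.foldl (fun d bb => d.modify bb 0 (· + 1)) d
        else match comp with
          | [] => d
          | c0 :: _ => if slA.getD c0 false then d.modify c0 0 (· + 1) else d) d).keys = N := by
  induction comps with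
  | nil => intro d hk _; simpa
  | cons c cs ih =>
    intro d hk hcN
    rw [List.foldl_cons]
    have hmodkeys : ∀ (d' : PySem.Dict Int Int) (x : Int), d'.keys = N → x ∈ N →
        (d'.modify x 0 (· + 1)).keys = N := by
      intro d' x hk' hx
      have hc1 : d'.contains x = true := by
        rw [PySem.Dict.contains_eq_decide_mem_keys, hk']; simp [hx]
      rw [PySem.Dict.keys_modify, PySem.Dict.keys_insert_of_contains _ _ hc1, hk']
    have hinner : ∀ (l : List Int) (d' : PySem.Dict Int Int), d'.keys = N → (∀ x ∈ l, x ∈ N) →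
        (l.foldl (fun d bb => d.modify bb 0 (· + 1)) d').keys = N := by
      intro l
      induction l with
      | nil => intro d' hk' _; simpa
      | cons y ys ihy =>
        intro d' hk' hl
        rw [List.foldl_cons]
        exact ihy _ (hmodkeys d' y hk' (hl y (by simp))) (fun z hz => hl z (by simp [hz]))
    refine ih _ ?_ (fun c' hc' x hx => hcN c' (by simp [hc']) x hx)
    by_cases hlen : 1 < c.length
    · rw [if_pos hlen]
      exact hinner c d hk (fun x hx => hcN c (by simp) x hx)
    · rw [if_neg hlen]
      cases c with
      | nil => exact hk
      | cons c0 t =>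
        by_cases hsl : slA.getD c0 false
        · simp only [hsl, if_true]
          exact hmodkeys d c0 hk (hcN (c0 :: t) (by simp) c0 (by simp))
        · simp only [hsl, Bool.false_eq_true, if_false]
          exact hk

theorem pvDepthStepVal (slA : PySem.Dict Int Bool) (slB : List Int) (N : List Int)
    (hSl : ∀ c ∈ N, (slA.getD c false = true ↔ c ∈ slB)) :
    ∀ (comps : List (List Int)) (d : PySem.Dict Int Int) (b : Int),
      comps.flatten.Nodup → (∀ c ∈ comps, ∀ x ∈ c, x ∈ N) → (∀ c ∈ comps, c ≠ []) →
    (comps.foldl (fun d comp =>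
        if 1 < comp.length then comp.foldl (fun d bb => d.modify bb 0 (· + 1)) d
        else match comp with
          | [] => d
          | c0 :: _ => if slA.getD c0 false then d.modify c0 0 (· + 1) else d) d).getD b 0
      = d.getD b 0 + (if ∃ c ∈ comps, b ∈ c ∧ pvQual slB c = true then 1 else 0) := by
  intro comps
  induction comps with
  | nil => intro d b _ _ _; simp
  | cons c cs ih =>
    intro d b hnd hcN hcne
    rw [List.foldl_cons]
    have hndc : c.Nodup := by
      rw [List.flatten_cons] at hnd
      exact (List.nodup_append.1 hnd).1
    have hdisj : ∀ x ∈ c, x ∉ cs.flatten := by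
      rw [List.flatten_cons] at hnd
      intro x hx
      exact fun hc => (List.disjoint_of_nodup_append hnd) hx hc
    have hndcs : cs.flatten.Nodup := by
      rw [List.flatten_cons] at hnd
      exact (List.nodup_append.1 hnd).2.1
    have hnotin : ∀ x ∈ c, ¬ ∃ c' ∈ cs, x ∈ c' ∧ pvQual slB c' = true := by
      rintro x hx ⟨c', hc', hxc', _⟩
      exact hdisj x hx (List.mem_flatten.2 ⟨c', hc', hxc'⟩)
    have hcsN : ∀ c' ∈ cs, ∀ x ∈ c', x ∈ N := fun c' hc' => hcN c' (by simp [hc'])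
    have hcsne : ∀ c' ∈ cs, c' ≠ [] := fun c' hc' => hcne c' (by simp [hc'])
    by_cases hlen : 1 < c.length
    · rw [if_pos hlen, ih _ b hndcs hcsN hcsne,
        PySem.Dict.getD_foldl_modify_add_one c d b]
      by_cases hbc : b ∈ c
      · have hcount : List.count b c = 1 := List.count_eq_one_of_mem hndc hbc
        have h1 : (∃ c' ∈ c :: cs, b ∈ c' ∧ pvQual slB c' = true) := ⟨c, by simp, hbc, pvQual_of_one_lt slB c hlen⟩
        have h2 : ¬ ∃ c' ∈ cs, b ∈ c' ∧ pvQual slB c' = true := hnotin b hbc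
        rw [if_pos h1, if_neg h2, hcount]
        omega
      · have hcount : List.count b c = 0 := List.count_eq_zero.2 hbc
        rw [hcount]
        have hiff : (∃ c' ∈ c :: cs, b ∈ c' ∧ pvQual slB c' = true) ↔ (∃ c' ∈ cs, b ∈ c' ∧ pvQual slB c' = true) := by
          constructor
          · rintro ⟨c', hc', hbc', hq⟩
            rcases List.mem_cons.1 hc' with rfl | h
            · exact absurd hbc' hbc
            · exact ⟨c', h, hbc', hq⟩
          · rintro ⟨c', hc', hbc', hq⟩
            exact ⟨c', by simp [hc'], hbc', hq⟩
        rw [if_congr hiff rfl rfl]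
        omega
    · obtain ⟨c0, t, rfl⟩ : ∃ c0 t, c = c0 :: t := by
        cases c with
        | nil => exact absurd rfl (hcne [] (by simp))
        | cons c0 t => exact ⟨c0, t, rfl⟩
      have ht : t = [] := by
        cases t with
        | nil => rfl
        | cons a l => simp at hlen
      subst ht
      have hc0N : c0 ∈ N := hcN [c0] (by simp) c0 (by simp)
      have hQiff : pvQual slB [c0] = true ↔ c0 ∈ slB := pvQual_singleton slB c0
      rw [if_neg hlen]
      by_cases hsl : slA.getD c0 false
      · simp only [hsl, if_true]
        rw [ih _ b hndcs hcsN hcsne, PySem.Dict.getD_modify d c0 b 0]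
        have hc0sl : c0 ∈ slB := (hSl c0 hc0N).1 hsl
        by_cases hbc : b = c0
        · subst hbc
          have h1 : (∃ c' ∈ [b] :: cs, b ∈ c' ∧ pvQual slB c' = true) :=
            ⟨[b], by simp, by simp, hQiff.2 hc0sl⟩
          have h2 : ¬ ∃ c' ∈ cs, b ∈ c' ∧ pvQual slB c' = true := hnotin b (by simp)
          rw [if_pos rfl, if_pos h1, if_neg h2]
          omega
        · have hiff : (∃ c' ∈ [c0] :: cs, b ∈ c' ∧ pvQual slB c' = true) ↔
              (∃ c' ∈ cs, b ∈ c' ∧ pvQual slB c' = true) := by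
            constructor
            · rintro ⟨c', hc', hbc', hq⟩
              rcases List.mem_cons.1 hc' with rfl | h
              · exact absurd (List.mem_singleton.1 hbc') hbc
              · exact ⟨c', h, hbc', hq⟩
            · rintro ⟨c', hc', hbc', hq⟩
              exact ⟨c', by simp [hc'], hbc', hq⟩
          rw [if_neg hbc, if_congr hiff rfl rfl]
      · simp only [hsl, Bool.false_eq_true, if_false]
        rw [ih _ b hndcs hcsN hcsne]
        have hnq : ¬ pvQual slB [c0] = true := fun h => hsl ((hSl c0 hc0N).2 (hQiff.1 h))
        have hiff : (∃ c' ∈ [c0] :: cs, b ∈ c' ∧ pvQual slB c' = true) ↔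
            (∃ c' ∈ cs, b ∈ c' ∧ pvQual slB c' = true) := by
          constructor
          · rintro ⟨c', hc', hbc', hq⟩
            rcases List.mem_cons.1 hc' with rfl | h
            · exact absurd hq hnq
            · exact ⟨c', h, hbc', hq⟩
          · rintro ⟨c', hc', hbc', hq⟩
            exact ⟨c', by simp [hc'], hbc', hq⟩
        rw [if_congr hiff rfl rfl]

-- ===== named pipeline stages (definitionally equal to the ports' let-chains) =====
def pvTrip (blocks : List Int) (edges : List (Int × Int)) :
    PySem.Dict Int (List Int) × PySem.Dict Int (List Int) × PySem.Dict Int Bool :=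
  edges.foldl
    (fun t e =>
      if !(t.1.contains e.1) || !(t.1.contains e.2) then t
      else (t.1.modify e.1 [] (· ++ [e.2]), t.2.1.modify e.2 [] (· ++ [e.1]),
            if e.1 = e.2 then t.2.2.insert e.1 true else t.2.2))
    (blocks.foldl (fun d b => d.insert b []) PySem.Dict.empty,
     blocks.foldl (fun d b => d.insert b []) PySem.Dict.empty,
     blocks.foldl (fun d b => d.insert b false) PySem.Dict.empty)

def pvP1A (blocks : List Int) (edges : List (Int × Int)) : PySem.Set Int × List Int :=
  blocks.foldl
    (fun st bb => if bb ∈ st.1 then st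
     else pvDfsA (pvTrip blocks edges).1 (blocks.length + 1) bb st) ([], [])

def pvP2A (blocks : List Int) (edges : List (Int × Int)) : PySem.Set Int × List (List Int) :=
  (pvP1A blocks edges).2.reverse.foldl
    (fun st bb =>
      if bb ∈ st.1 then st
      else ((pvRdfsA (pvTrip blocks edges).2.1 (blocks.length + 1) bb (st.1, [])).1,
            st.2 ++ [(pvRdfsA (pvTrip blocks edges).2.1 (blocks.length + 1) bb (st.1, [])).2]))
    ([], [])

def pvDepthA (blocks : List Int) (edges : List (Int × Int)) : PySem.Dict Int Int :=
  (pvP2A blocks edges).2.foldl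
    (fun d comp =>
      if 1 < comp.length then comp.foldl (fun d bb => d.modify bb 0 (· + 1)) d
      else
        match comp with
        | [] => d
        | c0 :: _ => if (pvTrip blocks edges).2.2.getD c0 false then d.modify c0 0 (· + 1) else d)
    (blocks.foldl (fun d b => d.insert b 0) PySem.Dict.empty)

theorem pvA_eq (blocks : List Int) (edges : List (Int × Int)) :
    estimate_loop_depths_py blocks edges = (pvDepthA blocks edges).items := rfl

def pvFedges (blocks : List Int) (edges : List (Int × Int)) : List (Int × Int) :=
  edges.filter (fun e => (PySem.Set.ofList (PySem.List.dedup blocks)).contains e.1 &&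
    (PySem.Set.ofList (PySem.List.dedup blocks)).contains e.2)

def pvSuccB (blocks : List Int) (edges : List (Int × Int)) : PySem.Dict Int (List Int) :=
  (PySem.List.dedup blocks).foldl
    (fun d b => d.insert b (((pvFedges blocks edges).filter (fun e => e.1 == b)).map (·.2)))
    PySem.Dict.empty

def pvPredB (blocks : List Int) (edges : List (Int × Int)) : PySem.Dict Int (List Int) :=
  (PySem.List.dedup blocks).foldl
    (fun d b => d.insert b (((pvFedges blocks edges).filter (fun e => e.2 == b)).map (·.1)))
    PySem.Dict.empty

def pvSlB (blocks : List Int) (edges : List (Int × Int)) : PySem.Set Int :=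
  PySem.Set.ofList (((pvFedges blocks edges).filter (fun e => e.1 == e.2)).map (·.1))

def pvP1B (blocks : List Int) (edges : List (Int × Int)) : PySem.Set Int × List Int :=
  blocks.foldl
    (fun st b =>
      if b ∈ st.1 then st
      else pvRunM (pvSuccB blocks edges) (2 * blocks.length + 2)
        [(b, (pvSuccB blocks edges).getD b [])] (PySem.Set.add st.1 b, st.2))
    ([], [])

def pvP2B (blocks : List Int) (edges : List (Int × Int)) : PySem.Set Int × PySem.Set Int :=
  (pvP1B blocks edges).2.reverse.foldl
    (fun st r =>
      if r ∈ st.1 then st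
      else ((pvRunR (pvPredB blocks edges) (blocks.length + 2) [r] (PySem.Set.add st.1 r, 1, st.2)).1,
            if 1 < (pvRunR (pvPredB blocks edges) (blocks.length + 2) [r] (PySem.Set.add st.1 r, 1, st.2)).2.1 then
              PySem.Set.add (pvRunR (pvPredB blocks edges) (blocks.length + 2) [r] (PySem.Set.add st.1 r, 1, st.2)).2.2 r
            else if r ∈ pvSlB blocks edges then
              PySem.Set.add (pvRunR (pvPredB blocks edges) (blocks.length + 2) [r] (PySem.Set.add st.1 r, 1, st.2)).2.2 r
            else (pvRunR (pvPredB blocks edges) (blocks.length + 2) [r] (PySem.Set.add st.1 r, 1, st.2)).2.2))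
    ([], [])

theorem pvB_eq (blocks : List Int) (edges : List (Int × Int)) :
    estimate_loop_depths_py_alt blocks edges
      = (PySem.List.dedup blocks).map
          (fun b => (b, if b ∈ (pvP2B blocks edges).2 then (1 : Int) else 0)) := rfl

-- ===== stage facts =====
theorem pvContains_ofList_dedup (blocks : List Int) (x : Int) :
    (PySem.Set.ofList (PySem.List.dedup blocks)).contains x
      = decide (x ∈ PySem.List.dedup blocks) := by
  by_cases hx : x ∈ PySem.List.dedup blocks
  · rw [decide_eq_true hx]
    exact (PySem.Set.contains_iff _ _).2 ((PySem.Set.mem_ofList _ _).2 hx)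
  · rw [decide_eq_false hx, ← Bool.not_eq_true]
    intro hc
    exact hx ((PySem.Set.mem_ofList _ _).1 ((PySem.Set.contains_iff _ _).1 hc))

theorem pvFedges_eq (blocks : List Int) (edges : List (Int × Int)) :
    pvFedges blocks edges = edges.filter
      (fun e => decide (e.1 ∈ PySem.List.dedup blocks) && decide (e.2 ∈ PySem.List.dedup blocks)) := by
  unfold pvFedges
  apply List.filter_congr
  intro e _
  rw [pvContains_ofList_dedup, pvContains_ofList_dedup]

theorem pvInit_keys (blocks : List Int) {ν : Type} (c : ν) :
    (blocks.foldl (fun d b => d.insert b c) PySem.Dict.empty).keys = PySem.List.dedup blocks := by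
  rw [pvKeys_foldl_insert_const, PySem.List.dedup_eq_ofList]

theorem pvTrip_eq (blocks : List Int) (edges : List (Int × Int)) :
    pvTrip blocks edges =
      ((pvFedges blocks edges).foldl (fun d e => d.modify e.1 [] (· ++ [e.2]))
          (blocks.foldl (fun d b => d.insert b []) PySem.Dict.empty),
       (pvFedges blocks edges).foldl (fun d e => d.modify e.2 [] (· ++ [e.1]))
          (blocks.foldl (fun d b => d.insert b []) PySem.Dict.empty),
       (pvFedges blocks edges).foldl (fun d e => if e.1 = e.2 then d.insert e.1 true else d)
          (blocks.foldl (fun d b => d.insert b false) PySem.Dict.empty)) := by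
  rw [pvFedges_eq]
  exact pvEdgeFold (PySem.List.dedup blocks) edges _ _ _ (pvInit_keys blocks [])

theorem pvFedges_mem_N (blocks : List Int) (edges : List (Int × Int)) :
    ∀ e ∈ pvFedges blocks edges, e.1 ∈ PySem.List.dedup blocks ∧ e.2 ∈ PySem.List.dedup blocks := by
  intro e he
  rw [pvFedges_eq] at he
  have := List.of_mem_filter he
  simpa using this

theorem pvSucc_getD (blocks : List Int) (edges : List (Int × Int)) (b : Int) :
    (pvSuccB blocks edges).getD b []
      = if b ∈ PySem.List.dedup blocks
        then ((pvFedges blocks edges).filter (fun e => e.1 == b)).map (·.2) else [] := by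
  unfold pvSuccB
  rw [pvGetD_foldl_insert_key]
  split <;> simp

theorem pvPred_getD (blocks : List Int) (edges : List (Int × Int)) (b : Int) :
    (pvPredB blocks edges).getD b []
      = if b ∈ PySem.List.dedup blocks
        then ((pvFedges blocks edges).filter (fun e => e.2 == b)).map (·.1) else [] := by
  unfold pvPredB
  rw [pvGetD_foldl_insert_key]
  split <;> simp

theorem pvAdj_getD (blocks : List Int) (edges : List (Int × Int)) (b : Int) :
    (pvTrip blocks edges).1.getD b [] = (pvSuccB blocks edges).getD b [] := by
  rw [pvTrip_eq, pvSucc_getD]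
  show ((pvFedges blocks edges).foldl (fun d e => d.modify e.1 [] (· ++ [e.2]))
      (blocks.foldl (fun d b => d.insert b []) PySem.Dict.empty)).getD b [] = _
  rw [PySem.Dict.getD_foldl_modify_append]
  rw [pvGetD_foldl_insert_const blocks PySem.Dict.empty [] b (PySem.Dict.getD_empty b [])]
  by_cases hb : b ∈ PySem.List.dedup blocks
  · rw [if_pos hb]; rfl
  · rw [if_neg hb]
    have : (pvFedges blocks edges).filter (fun p => p.1 == b) = [] := by
      rw [List.filter_eq_nil_iff]
      intro e he
      have := (pvFedges_mem_N blocks edges e he).1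
      simp only [beq_iff_eq]
      intro hc; exact hb (hc ▸ this)
    rw [this]; rfl

theorem pvRadj_getD (blocks : List Int) (edges : List (Int × Int)) (b : Int) :
    (pvTrip blocks edges).2.1.getD b [] = (pvPredB blocks edges).getD b [] := by
  rw [pvTrip_eq, pvPred_getD]
  show ((pvFedges blocks edges).foldl (fun d e => d.modify e.2 [] (· ++ [e.1]))
      (blocks.foldl (fun d b => d.insert b []) PySem.Dict.empty)).getD b [] = _
  have hswap : (pvFedges blocks edges).foldl (fun d e => d.modify e.2 [] (· ++ [e.1]))
      (blocks.foldl (fun d b => d.insert b []) PySem.Dict.empty)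
      = ((pvFedges blocks edges).map Prod.swap).foldl (fun d p => d.modify p.1 [] (· ++ [p.2]))
        (blocks.foldl (fun d b => d.insert b []) PySem.Dict.empty) := by
    rw [List.foldl_map]
    rfl
  rw [hswap, PySem.Dict.getD_foldl_modify_append]
  rw [pvGetD_foldl_insert_const blocks PySem.Dict.empty [] b (PySem.Dict.getD_empty b [])]
  have hfm : ((pvFedges blocks edges).map Prod.swap).filter (fun p => p.1 == b)
      = ((pvFedges blocks edges).filter (fun e => e.2 == b)).map Prod.swap := by
    rw [List.filter_map]
    rfl
  rw [hfm]
  by_cases hb : b ∈ PySem.List.dedup blocks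
  · rw [if_pos hb, List.map_map]
    rfl
  · rw [if_neg hb]
    have : (pvFedges blocks edges).filter (fun e => e.2 == b) = [] := by
      rw [List.filter_eq_nil_iff]
      intro e he
      have := (pvFedges_mem_N blocks edges e he).2
      simp only [beq_iff_eq]
      intro hc; exact hb (hc ▸ this)
    rw [this]; rfl

theorem pvSl_getD (blocks : List Int) (edges : List (Int × Int)) (c : Int) :
    ((pvTrip blocks edges).2.2.getD c false = true ↔ c ∈ pvSlB blocks edges) := by
  rw [pvTrip_eq]
  show ((pvFedges blocks edges).foldl (fun d e => if e.1 = e.2 then d.insert e.1 true else d)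
      (blocks.foldl (fun d b => d.insert b false) PySem.Dict.empty)).getD c false = true ↔ _
  rw [pvSlFold]
  rw [pvGetD_foldl_insert_const blocks PySem.Dict.empty false c (PySem.Dict.getD_empty c false)]
  unfold pvSlB
  rw [PySem.Set.mem_ofList _ _]
  simp

theorem pvSucc_val (blocks : List Int) (edges : List (Int × Int)) :
    ∀ b x, x ∈ (pvSuccB blocks edges).getD b [] → x ∈ PySem.List.dedup blocks := by
  intro b x hx
  rw [pvSucc_getD] at hx
  split at hx
  · obtain ⟨e, he, rfl⟩ := List.mem_map.1 hx
    exact (pvFedges_mem_N blocks edges e (List.mem_of_mem_filter he)).2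
  · simp at hx

theorem pvPred_val (blocks : List Int) (edges : List (Int × Int)) :
    ∀ b x, x ∈ (pvPredB blocks edges).getD b [] → x ∈ PySem.List.dedup blocks := by
  intro b x hx
  rw [pvPred_getD] at hx
  split at hx
  · obtain ⟨e, he, rfl⟩ := List.mem_map.1 hx
    exact (pvFedges_mem_N blocks edges e (List.mem_of_mem_filter he)).1
  · simp at hx

-- ===== final assembly =====
theorem pvMain (blocks : List Int) (edges : List (Int × Int)) :
    estimate_loop_depths_py blocks edges = estimate_loop_depths_py_alt blocks edges := by
  rw [pvA_eq, pvB_eq]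
  have hNd : (PySem.List.dedup blocks).Nodup := PySem.List.nodup_dedup blocks
  have hNlen : (PySem.List.dedup blocks).length ≤ blocks.length := by
    rw [PySem.List.dedup_eq_ofList]
    exact PySem.Set.length_ofList_le blocks
  have hAdjVal : ∀ b x, x ∈ (pvTrip blocks edges).1.getD b [] → x ∈ PySem.List.dedup blocks := by
    intro b x hx
    rw [pvAdj_getD] at hx
    exact pvSucc_val blocks edges b x hx
  have hRadjVal : ∀ b x, x ∈ (pvTrip blocks edges).2.1.getD b [] → x ∈ PySem.List.dedup blocks := by
    intro b x hx
    rw [pvRadj_getD] at hx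
    exact pvPred_val blocks edges b x hx
  -- pass 1
  obtain ⟨hP1, δv, δo, hP1A, hperm, hδN, hδnd, hδcov⟩ :=
    pvPass1 (pvTrip blocks edges).1 (pvSuccB blocks edges) (PySem.List.dedup blocks)
      hAdjVal (pvSucc_val blocks edges) (pvAdj_getD blocks edges)
      (blocks.length + 1) (by omega) (2 * blocks.length + 2) (by omega)
      blocks [] [] (fun b hb => (PySem.List.mem_dedup _ _).2 hb) (by simp)
  have hP1' : pvP1A blocks edges = pvP1B blocks edges := hP1
  have hP1A' : pvP1A blocks edges = (δv, δo) := by simpa using hP1A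
  have horder : (pvP1A blocks edges).2 = δo := by rw [hP1A']
  have horderN : ∀ b ∈ (pvP1A blocks edges).2, b ∈ PySem.List.dedup blocks := by
    rw [horder]
    intro b hb
    exact hδN b (hperm.symm.subset hb)
  have hcovN : ∀ b ∈ PySem.List.dedup blocks, b ∈ (pvP1A blocks edges).2 := by
    rw [horder]
    intro b hb
    have hbb : b ∈ blocks := (PySem.List.mem_dedup _ _).1 hb
    have : b ∈ δv := by simpa using hδcov b hbb
    exact hperm.subset this
  -- pass 2
  obtain ⟨c1, c2, c3, c4, c5, _, _⟩ :=
    pvPass2 (pvTrip blocks edges).2.1 (pvPredB blocks edges) (pvSlB blocks edges)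
      (PySem.List.dedup blocks) hNd hRadjVal (pvPred_val blocks edges)
      (pvRadj_getD blocks edges)
      (blocks.length + 1) (by omega) (blocks.length + 2) (by omega)
      (pvP1A blocks edges).2.reverse [] [] [] []
      (fun b hb => horderN b (List.mem_reverse.1 hb))
      (fun x => Iff.rfl) (by simp) (by simp) (by simp)
      (by intro x; simp)
      (by simp) (by simp) (by simp)
  -- identify the fold states with pvP2A / pvP2B
  have hc1 : ∀ x, x ∈ (pvP2B blocks edges).2 ↔
      ∃ c ∈ (pvP2A blocks edges).2, x ∈ c ∧ pvQual (pvSlB blocks edges) c = true := by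
    intro x
    have := c1 x
    unfold pvP2B
    rw [← hP1']
    exact this
  have hc2 : ∀ c ∈ (pvP2A blocks edges).2, ∀ x ∈ c, x ∈ PySem.List.dedup blocks := c2
  have hc3 : ∀ c ∈ (pvP2A blocks edges).2, c ≠ [] := c3
  have hc4 : (pvP2A blocks edges).2.flatten.Nodup := c4
  -- depth dict
  have hd0 : ∀ b, (blocks.foldl (fun d b => d.insert b (0 : Int)) PySem.Dict.empty).getD b 0 = 0 :=
    fun b => pvGetD_foldl_insert_const blocks PySem.Dict.empty 0 b (PySem.Dict.getD_empty b 0)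
  have hkeys : (pvDepthA blocks edges).keys = PySem.List.dedup blocks := by
    unfold pvDepthA
    exact pvDepthStepKeys (pvTrip blocks edges).2.2 (PySem.List.dedup blocks)
      (pvP2A blocks edges).2 _ (pvInit_keys blocks 0) hc2
  have hval : ∀ b, (pvDepthA blocks edges).getD b 0
      = (if b ∈ (pvP2B blocks edges).2 then (1 : Int) else 0) := by
    intro b
    unfold pvDepthA
    rw [pvDepthStepVal (pvTrip blocks edges).2.2 (pvSlB blocks edges) (PySem.List.dedup blocks)
      (fun c hc => pvSl_getD blocks edges c) (pvP2A blocks edges).2 _ b hc4 hc2 hc3, hd0]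
    by_cases hb : b ∈ (pvP2B blocks edges).2
    · rw [if_pos hb, if_pos ((hc1 b).1 hb)]
      simp
    · rw [if_neg hb, if_neg (fun hc => hb ((hc1 b).2 hc))]
      simp
  have hitems : (pvDepthA blocks edges).items
      = (PySem.List.dedup blocks).map (fun k => (k, (pvDepthA blocks edges).getD k 0)) := by
    rw [PySem.Dict.items_eq_map_keys (pvDepthA blocks edges) (by rw [hkeys]; exact hNd) 0, hkeys]
  rw [hitems]
  apply List.map_congr_left
  intro b _
  rw [hval b]


-- ===== VERDICT (by name: the statement is the Claim_ definition above) =====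
theorem estimate_loop_depths_py_spec : Claim_equal_estimate_loop_depths_py := by
  intro blocks edges _
  show estimate_loop_depths_py blocks edges = estimate_loop_depths_py_alt blocks edges
  exact pvMain blocks edges
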